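-- pv_equiv track=rewrite | github.com/C2SM/Sirocco | src/sirocco/workgraph/__init__.py | compute_topological_levels
-- ===== SOURCE A (Python) =====
-- from collections import deque
--
-- def compute_topological_levels(task_deps: dict[str, list[str]]) -> dict[str, int]:
--     """Compute topological level for each task using BFS.
--
--     Level 0 = no dependencies
--     Level k = max(parent levels) + 1
--
--     Args:
--         task_deps: Dict mapping task_name -> list of parent task names
--
--     Returns:
--         Dict mapping task_name -> topological level
--     """
--     levels = {}
--     in_degree = {task_name: len(parents) for task_name, parents in task_deps.items()}
--
--     # Find all tasks with no dependencies (level 0)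
--     queue = deque([task_name for task_name, degree in in_degree.items() if degree == 0])
--     for task_name in queue:
--         levels[task_name] = 0
--
--     # Build reverse dependency graph: task -> list of tasks that depend on it
--     children: dict[str, list[str]] = {task_name: [] for task_name in task_deps}
--     for task_name, parents in task_deps.items():
--         for parent in parents:
--             if parent not in children:
--                 children[parent] = []
--             children[parent].append(task_name)
--
--     # Process tasks in topological order
--     processed = set()
--     while queue:
--         current = queue.popleft()
--         processed.add(current)
--
--         # Update children's levels
--         for child in children.get(current, []):
--             parents = task_deps[child]
--             # Check if all parents have been processed
--             if all(p in processed for p in parents):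
--                 # Level is max of all parent levels + 1
--                 parent_levels = [levels[p] for p in parents]
--                 levels[child] = max(parent_levels) + 1
--                 queue.append(child)
--
--     return levels
-- ===== SOURCE B (Python) =====
-- from collections import deque
--
-- def compute_topological_levels(task_deps: dict[str, list[str]]) -> dict[str, int]:
--     """Kahn's algorithm: one counter of DISTINCT outstanding parents per task,
--     decremented once per distinct edge; no 'processed' set and no per-edge
--     rescan of all parents of a child.  One pass builds both the counters and
--     the reverse graph; a second seeds the ready queue."""
--     remaining = {}
--     children = {}
--     for t, ps in task_deps.items():
--         dps = dict.fromkeys(ps)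
--         remaining[t] = len(dps)
--         for p in dps:
--             children.setdefault(p, []).append(t)
--     levels = {}
--     queue = deque()
--     for t, r in remaining.items():
--         if r == 0:
--             levels[t] = 0
--             queue.append(t)
--     while queue:
--         cur = queue.popleft()
--         for child in children.get(cur, []):
--             remaining[child] -= 1
--             if remaining[child] == 0:
--                 lvl = 0
--                 for p in task_deps[child]:
--                     lvl = max(lvl, levels[p])
--                 levels[child] = lvl + 1
--                 queue.append(child)
--     return levels
-- ===== Notes on version B (the rewrite author's own statement) =====
-- stated objective: alternative
-- what changed: B replaces A's per-edge readiness machinery (a 'processed' set, an all()-rescan of every parent of a child on every edge, and duplicate queue entries that A re-processes on duplicated parent edges) by Kahn's algorithm with one distinct-parent counter per task, decremented once per distinct edge, so each task is enqueued and processed exactly once; the returned dict is identical, including insertion order.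
import Mathlib
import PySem

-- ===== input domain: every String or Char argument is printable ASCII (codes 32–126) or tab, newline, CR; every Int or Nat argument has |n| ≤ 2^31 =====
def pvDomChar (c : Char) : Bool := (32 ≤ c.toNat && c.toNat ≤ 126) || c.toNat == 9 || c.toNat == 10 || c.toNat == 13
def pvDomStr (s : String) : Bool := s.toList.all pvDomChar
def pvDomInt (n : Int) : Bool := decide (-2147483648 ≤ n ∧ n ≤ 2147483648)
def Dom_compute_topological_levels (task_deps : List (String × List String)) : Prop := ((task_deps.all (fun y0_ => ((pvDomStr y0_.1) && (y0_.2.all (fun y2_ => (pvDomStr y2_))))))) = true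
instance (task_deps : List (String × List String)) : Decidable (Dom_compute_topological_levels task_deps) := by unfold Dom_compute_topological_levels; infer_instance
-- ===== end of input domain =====

-- B replaces A's per-edge readiness rescan (a 'processed' set plus an all()-test over every
-- parent of a child on every edge, with duplicate queue entries re-processed) by Kahn's
-- algorithm with one distinct-parent counter per task, decremented once per distinct edge.


-- ===== PORT A =====
-- The dict argument, decoded from its association-list encoding exactly as Python
-- builds a dict (a later duplicate key overwrites in place).  Input decoding shared
-- by both ports; not part of either algorithm.
def pvDictOf (task_deps : List (String × List String)) : PySem.Dict String (List String) :=
  PySem.Dict.ofList task_deps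

-- in_degree = {task_name: len(parents) for task_name, parents in task_deps.items()}
def pvInDegA (items : List (String × List String)) : PySem.Dict String Int :=
  items.foldl (fun d p => d.insert p.1 (p.2.length : Int)) PySem.Dict.empty

-- [task_name for task_name, degree in in_degree.items() if degree == 0]
def pvQueue0A (deg : PySem.Dict String Int) : List String :=
  (deg.items.filter (fun p => p.2 == 0)).map (fun p => p.1)

-- children = {t: [] for t in task_deps}; then the two nested "append" loops
def pvChildrenA (items : List (String × List String)) : PySem.Dict String (List String) :=
  items.foldl (fun c p =>
    p.2.foldl (fun c parent =>
      (if c.contains parent then c else c.insert parent ([] : List String)).modify parent []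
        (fun l => l ++ [p.1])) c)
    (items.foldl (fun c p => c.insert p.1 ([] : List String)) PySem.Dict.empty)

-- while queue: … .  Fuel: an upper bound on the number of queue pops (with duplicated
-- parent edges A re-enqueues tasks, so pops can exceed the task count); proved
-- sufficient below via a decreasing potential (pvPhi).
def pvFuelA (items : List (String × List String)) : Nat :=
  ((items.map (fun p => p.2.length)).sum + items.length + 2) ^ (items.length + 2)

def pvLoopA (d children : PySem.Dict String (List String)) :
    Nat → List String → PySem.Dict String Int → PySem.Set String → PySem.Dict String Int
  | 0, _, levels, _ => levels
  | _ + 1, [], levels, _ => levels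
  | fuel + 1, current :: rest, levels, processed =>
    let processed' := PySem.Set.add processed current
    let step := (children.getD current []).foldl
      (fun (acc : PySem.Dict String Int × List String) child =>
        -- parents = task_deps[child]: child is always a key of the dict, so getD is exact
        let parents := d.getD child []
        if parents.all (fun p => PySem.Set.contains processed' p) then
          let parent_levels := parents.map (fun p => acc.1.getD p 0)
          -- max(parent_levels): parents is nonempty here (child has parent `current`)
          (acc.1.insert child ((PySem.List.max? parent_levels id).getD 0 + 1), acc.2 ++ [child])
        else acc)
      (levels, ([] : List String))
    pvLoopA d children fuel (rest ++ step.2) step.1 processed'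

def compute_topological_levels (task_deps : List (String × List String)) : List (String × Int) :=
  let d := pvDictOf task_deps
  let in_degree := pvInDegA d.items
  let queue := pvQueue0A in_degree
  let levels := queue.foldl (fun L t => L.insert t (0 : Int)) PySem.Dict.empty
  let children := pvChildrenA d.items
  (pvLoopA d children (pvFuelA d.items) queue levels PySem.Set.empty).items

-- ===== PORT B =====
-- one pass over the items builds both the distinct-parent counters
-- (remaining = {t: len(dict.fromkeys(ps))}) and the reverse graph
-- (children.setdefault(p, []).append(t) over the distinct parents)
def pvInitB (items : List (String × List String)) :
    PySem.Dict String Int × PySem.Dict String (List String) :=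
  items.foldl (fun rc p =>
    let dps := PySem.List.dedup p.2
    (rc.1.insert p.1 (dps.length : Int),
     dps.foldl (fun c parent => c.modify parent [] (fun l => l ++ [p.1])) rc.2))
    (PySem.Dict.empty, PySem.Dict.empty)

-- for t, r in remaining.items(): if r == 0: levels[t] = 0; queue.append(t)
def pvSeedB (rem : PySem.Dict String Int) : PySem.Dict String Int × List String :=
  rem.items.foldl (fun lq p =>
    if p.2 == 0 then (lq.1.insert p.1 (0 : Int), lq.2 ++ [p.1]) else lq)
    (PySem.Dict.empty, ([] : List String))

-- while queue: … .  Fuel: every task is enqueued at most once (its counter reaches 0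
-- at most once), so the number of pops is at most the number of tasks.
def pvLoopB (d children : PySem.Dict String (List String)) :
    Nat → List String → PySem.Dict String Int → PySem.Dict String Int → PySem.Dict String Int
  | 0, _, levels, _ => levels
  | _ + 1, [], levels, _ => levels
  | fuel + 1, current :: rest, levels, remaining =>
    let step := (children.getD current []).foldl
      (fun (acc : PySem.Dict String Int × PySem.Dict String Int × List String) child =>
        -- remaining[child] -= 1 : child is always a key of remaining, so modify is exact
        let rem := acc.2.1.modify child 0 (fun v => v - 1)
        if rem.getD child 0 == 0 then
          -- lvl = 0; for p in task_deps[child]: lvl = max(lvl, levels[p])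
          (acc.1.insert child
             ((d.getD child []).foldl (fun lvl p => max lvl (acc.1.getD p 0)) 0 + 1),
           rem, acc.2.2 ++ [child])
        else (acc.1, rem, acc.2.2))
      (levels, remaining, ([] : List String))
    pvLoopB d children fuel (rest ++ step.2.2) step.1 step.2.1

def compute_topological_levels_alt (task_deps : List (String × List String)) : List (String × Int) :=
  let d := pvDictOf task_deps
  let rc := pvInitB d.items
  let lq := pvSeedB rc.1
  (pvLoopB d rc.2 (task_deps.length + 1) lq.2 lq.1 rc.1).items

-- ===== PRECONDITION & SPEC =====
def Spec_compute_topological_levels (task_deps : List (String × List String)) (out : List (String × Int)) : Prop := out = compute_topological_levels_alt task_deps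
instance (task_deps : List (String × List String)) (out : List (String × Int)) : Decidable (Spec_compute_topological_levels task_deps out) := by unfold Spec_compute_topological_levels; infer_instance

-- ===== CLAIM (what is proved, stated in full; the proofs are below) =====
def Claim_equal_compute_topological_levels : Prop := ∀ (task_deps : List (String × List String)), Dom_compute_topological_levels task_deps → Spec_compute_topological_levels task_deps (compute_topological_levels task_deps)

-- ===== LEMMAS AND PROOFS =====

-- ===== helper definitions and lemmas for the proofs =====

-- the three B-side folds, separated (the port fuses the first two / the last two;
-- pvInitB_fst/snd and pvSeedB_fst/snd below split them)
def pvRemaining0 (items : List (String × List String)) : PySem.Dict String Int :=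
  items.foldl (fun r p => r.insert p.1 ((PySem.List.dedup p.2).length : Int)) PySem.Dict.empty

def pvChildrenB (items : List (String × List String)) : PySem.Dict String (List String) :=
  items.foldl (fun c p =>
    (PySem.List.dedup p.2).foldl (fun c parent => c.modify parent [] (fun l => l ++ [p.1])) c)
    PySem.Dict.empty

def pvLevels0B (rem : PySem.Dict String Int) : PySem.Dict String Int :=
  rem.items.foldl (fun L p => if p.2 == 0 then L.insert p.1 (0 : Int) else L) PySem.Dict.empty

lemma pvInitB_split : ∀ (items : List (String × List String))
    (r : PySem.Dict String Int) (c : PySem.Dict String (List String)),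
    items.foldl (fun rc p =>
      let dps := PySem.List.dedup p.2
      (rc.1.insert p.1 (dps.length : Int),
       dps.foldl (fun c parent => c.modify parent [] (fun l => l ++ [p.1])) rc.2)) (r, c)
    = (items.foldl (fun r p => r.insert p.1 ((PySem.List.dedup p.2).length : Int)) r,
       items.foldl (fun c p =>
         (PySem.List.dedup p.2).foldl
           (fun c parent => c.modify parent [] (fun l => l ++ [p.1])) c) c)
  | [], _, _ => rfl
  | p :: t, r, c => by
    simp only [List.foldl_cons]
    exact pvInitB_split t _ _

lemma pvInitB_fst (items : List (String × List String)) :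
    (pvInitB items).1 = pvRemaining0 items := by
  unfold pvInitB pvRemaining0
  rw [pvInitB_split]

lemma pvInitB_snd (items : List (String × List String)) :
    (pvInitB items).2 = pvChildrenB items := by
  unfold pvInitB pvChildrenB
  rw [pvInitB_split]

lemma pvSeedB_split : ∀ (ps : List (String × Int))
    (L : PySem.Dict String Int) (q : List String),
    ps.foldl (fun lq p =>
      if p.2 == 0 then (lq.1.insert p.1 (0 : Int), lq.2 ++ [p.1]) else lq) (L, q)
    = (ps.foldl (fun L p => if p.2 == 0 then L.insert p.1 (0 : Int) else L) L,
       q ++ (ps.filter (fun p => p.2 == 0)).map (fun p => p.1))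
  | [], _, _ => by simp
  | p :: t, L, q => by
    simp only [List.foldl_cons, List.filter_cons]
    by_cases hp : p.2 == 0
    · simp only [hp, if_true]
      rw [pvSeedB_split t _ _]
      simp
    · simp only [hp, Bool.false_eq_true, if_false]
      exact pvSeedB_split t L q

lemma pvSeedB_fst (rem : PySem.Dict String Int) :
    (pvSeedB rem).1 = pvLevels0B rem := by
  unfold pvSeedB pvLevels0B
  rw [pvSeedB_split]

lemma pvSeedB_snd (rem : PySem.Dict String Int) :
    (pvSeedB rem).2 = pvQueue0A rem := by
  unfold pvSeedB
  rw [pvSeedB_split]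
  rfl


-- ordered first-occurrence dedup, structurally convenient form (= PySem.Set.ofList, proved below)
def pvDedup : List String → List String
  | [] => []
  | c :: l => c :: pvDedup (l.filter (fun y => y != c))
termination_by l => l.length
decreasing_by simpa using Nat.lt_succ_of_le (List.length_filter_le _ _)

lemma pvDedup_nil : pvDedup [] = [] := by simp [pvDedup]
lemma pvDedup_cons (c : String) (l : List String) :
    pvDedup (c :: l) = c :: pvDedup (l.filter (fun y => y != c)) := by simp [pvDedup]

lemma mem_pvDedup : ∀ (l : List String) (a : String), a ∈ pvDedup l ↔ a ∈ l
  | [], a => by simp [pvDedup]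
  | c :: l, a => by
    rw [pvDedup_cons]
    by_cases hac : a = c
    · subst hac; simp
    · simp only [List.mem_cons, hac, false_or]
      rw [mem_pvDedup (l.filter (fun y => y != c)) a]
      simp [hac]
termination_by l => l.length
decreasing_by simpa using Nat.lt_succ_of_le (List.length_filter_le _ _)

lemma nodup_pvDedup : ∀ (l : List String), (pvDedup l).Nodup
  | [] => by simp [pvDedup]
  | c :: l => by
    rw [pvDedup_cons, List.nodup_cons]
    constructor
    · intro hmem
      have := (mem_pvDedup _ c).mp hmem
      simp at this
    · exact nodup_pvDedup (l.filter (fun y => y != c))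
termination_by l => l.length
decreasing_by simpa using Nat.lt_succ_of_le (List.length_filter_le _ _)

lemma pvDedup_eq_self_of_nodup : ∀ (l : List String), l.Nodup → pvDedup l = l
  | [], _ => pvDedup_nil
  | c :: l, h => by
    rw [pvDedup_cons]
    have h1 : l.filter (fun y => y != c) = l := by
      apply List.filter_eq_self.mpr
      intro a ha
      have : a ≠ c := fun he => (List.nodup_cons.mp h).1 (he ▸ ha)
      simpa using this
    rw [h1, pvDedup_eq_self_of_nodup l (List.nodup_cons.mp h).2]
termination_by l => l.length
decreasing_by simpa using Nat.lt_succ_of_le (List.length_filter_le _ _)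

lemma pvDedup_filter (p : String → Bool) : ∀ (l : List String),
    pvDedup (l.filter p) = (pvDedup l).filter p
  | [] => by simp [pvDedup_nil]
  | c :: l => by
    rw [List.filter_cons, pvDedup_cons, List.filter_cons]
    by_cases hc : p c
    · simp only [hc, if_true]
      rw [pvDedup_cons]
      have h1 : (l.filter p).filter (fun y => y != c) = (l.filter (fun y => y != c)).filter p := by
        rw [List.filter_filter, List.filter_filter]
        apply List.filter_congr; intro a _; exact Bool.and_comm _ _
      rw [h1, pvDedup_filter p (l.filter (fun y => y != c))]
    · simp only [hc, Bool.false_eq_true, if_false]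
      have h2 : l.filter p = (l.filter (fun y => y != c)).filter p := by
        rw [List.filter_filter]
        apply List.filter_congr
        intro a _
        by_cases hp : p a
        · have hac : a ≠ c := fun he => by rw [he] at hp; exact absurd hp (by simp [hc])
          simp [hp, hac]
        · simp [hp]
      rw [h2, pvDedup_filter p (l.filter (fun y => y != c))]
termination_by l => l.length
decreasing_by all_goals simpa using Nat.lt_succ_of_le (List.length_filter_le _ _)

lemma pvDedup_append_subset : ∀ (l1 l2 : List String), (∀ a ∈ l2, a ∈ l1) →
    pvDedup (l1 ++ l2) = pvDedup l1
  | [], l2, h => by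
    have : l2 = [] := List.eq_nil_iff_forall_not_mem.mpr (fun a ha => by simpa using h a ha)
    simp [this]
  | c :: l1, l2, h => by
    rw [List.cons_append, pvDedup_cons, pvDedup_cons, List.filter_append]
    congr 1
    apply pvDedup_append_subset
    intro a ha
    have ha2 := List.mem_filter.mp ha
    rcases List.mem_cons.mp (h a ha2.1) with h1 | h1
    · exact absurd (by simpa using ha2.2) (by simp [h1])
    · exact List.mem_filter.mpr ⟨h1, ha2.2⟩
termination_by l1 _ => l1.length
decreasing_by simpa using Nat.lt_succ_of_le (List.length_filter_le _ _)

lemma pvDedup_append_disjoint : ∀ (l1 l2 : List String), (∀ a ∈ l2, a ∉ l1) →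
    pvDedup (l1 ++ l2) = pvDedup l1 ++ pvDedup l2
  | [], l2, _ => by simp [pvDedup_nil]
  | c :: l1, l2, h => by
    rw [List.cons_append, pvDedup_cons, pvDedup_cons, List.filter_append]
    have h2 : l2.filter (fun y => y != c) = l2 := by
      apply List.filter_eq_self.mpr
      intro a ha
      have : a ≠ c := fun he => h a ha (he ▸ List.mem_cons_self)
      simpa using this
    rw [h2, List.cons_append]
    congr 1
    apply pvDedup_append_disjoint
    intro a ha hmem
    exact h a ha (List.mem_cons_of_mem _ (List.mem_filter.mp hmem).1)
termination_by l1 _ => l1.length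
decreasing_by simpa using Nat.lt_succ_of_le (List.length_filter_le _ _)

lemma pvDedup_length_le : ∀ (l : List String), (pvDedup l).length ≤ l.length
  | [] => by simp [pvDedup_nil]
  | c :: l => by
    rw [pvDedup_cons, List.length_cons, List.length_cons]
    have h1 := pvDedup_length_le (l.filter (fun y => y != c))
    have h2 := List.length_filter_le (fun y => y != c) l
    omega
termination_by l => l.length
decreasing_by simpa using Nat.lt_succ_of_le (List.length_filter_le _ _)

lemma pvDedup_eq_nil_iff (l : List String) : pvDedup l = [] ↔ l = [] := by
  cases l with
  | nil => simp [pvDedup_nil]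
  | cons c t => simp [pvDedup_cons]

-- PySem.Set.update in terms of pvDedup; hence Set.ofList = pvDedup
lemma pvSet_update_eq : ∀ (l : List String) (s : PySem.Set String),
    PySem.Set.update s l = s ++ pvDedup (l.filter (fun y => !(PySem.Set.contains s y)))
  | [], s => by simp [PySem.Set.update, pvDedup_nil]
  | c :: l, s => by
    show PySem.Set.update (PySem.Set.add s c) l = _
    by_cases hc : c ∈ s
    · have hadd : PySem.Set.add s c = s := by simp [PySem.Set.add, hc]
      have hcc : (!(PySem.Set.contains s c)) = false := by
        simp [PySem.Set.contains, hc]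
      rw [hadd, pvSet_update_eq l s, List.filter_cons, hcc]
      simp
    · have hadd : PySem.Set.add s c = s ++ [c] := by simp [PySem.Set.add, hc]
      have hcc : (!(PySem.Set.contains s c)) = true := by
        simp [PySem.Set.contains, hc]
      rw [hadd, pvSet_update_eq l (s ++ [c]), List.filter_cons, hcc]
      simp only [if_pos trivial, pvDedup_cons, List.append_assoc, List.singleton_append]
      congr 2
      rw [List.filter_filter]
      congr 1
      apply List.filter_congr
      intro a _
      by_cases hac : a = c
      · subst hac; simp [PySem.Set.contains, hc]
      · by_cases has : a ∈ s <;> simp [PySem.Set.contains, has, hac]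

lemma pvOfList_eq_pvDedup (l : List String) : PySem.Set.ofList l = pvDedup l := by
  have h1 : PySem.Set.ofList l = PySem.Set.update PySem.Set.empty l := rfl
  rw [h1, pvSet_update_eq]
  have h2 : l.filter (fun y => !(PySem.Set.contains PySem.Set.empty y)) = l := by
    apply List.filter_eq_self.mpr
    intro a _
    simp [PySem.Set.empty, PySem.Set.contains]
  rw [h2]
  simp [PySem.Set.empty]

lemma pvListDedup_eq (l : List String) : PySem.List.dedup l = pvDedup l := by
  rw [PySem.List.dedup_eq_ofList, pvOfList_eq_pvDedup]


-- ===== dict helpers =====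
lemma pvGet?_of_mem_keys (L : PySem.Dict String Int) (c : String) (h : c ∈ L.keys) :
    L.get? c = some (L.getD c 0) := by
  have hc : L.contains c = true := by
    rw [PySem.Dict.contains_eq_decide_mem_keys]; simpa
  rw [PySem.Dict.contains_eq_isSome_get?] at hc
  cases hg : L.get? c with
  | none => rw [hg] at hc; simp at hc
  | some v => rw [PySem.Dict.getD_eq_get?_getD, hg]; rfl

lemma pvInsert_noop (L : PySem.Dict String Int) (k : String) (v : Int)
    (hnd : L.keys.Nodup) (h : L.get? k = some v) : L.insert k v = L := by
  apply PySem.Dict.ext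
  have hc : L.contains k = true := by
    rw [PySem.Dict.contains_eq_isSome_get?, h]; rfl
  rw [PySem.Dict.items_insert_of_contains (d := L) (v := v) hc]
  have hall : ∀ p ∈ L.items, (if p.1 == k then (k, v) else p) = p := by
    intro p hp
    obtain ⟨p1, p2⟩ := p
    by_cases hpk : p1 = k
    · subst hpk
      have h2 : L.get? p1 = some p2 := PySem.Dict.get?_of_mem_items L hp hnd
      rw [h] at h2
      simp [Option.some.inj h2]
    · simp [hpk]
  rw [List.map_congr_left hall]
  simp

-- ===== the reverse-dependency ("children") dicts =====
-- the edge lists (parent, task) in the order the two Pythons traverse them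
def pvEdges (items : List (String × List String)) : List (String × String) :=
  items.flatMap (fun p => p.2.map (fun parent => (parent, p.1)))

def pvEdgesB (items : List (String × List String)) : List (String × String) :=
  items.flatMap (fun p => (PySem.List.dedup p.2).map (fun parent => (parent, p.1)))

lemma pvFoldl_nested {γ : Type} (items : List (String × List String))
    (sel : String × List String → List String)
    (g : γ → String → String → γ) (c0 : γ) :
    items.foldl (fun c p => (sel p).foldl (fun c parent => g c parent p.1) c) c0
      = (items.flatMap (fun p => (sel p).map (fun parent => (parent, p.1)))).foldl
          (fun c e => g c e.1 e.2) c0 := by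
  induction items generalizing c0 with
  | nil => rfl
  | cons p t ih =>
    simp only [List.foldl_cons, List.flatMap_cons, List.foldl_append, List.foldl_map]
    exact ih _

lemma pvChildrenB_getD (items : List (String × List String)) (x : String) :
    (pvChildrenB items).getD x []
      = ((pvEdgesB items).filter (fun e => e.1 == x)).map (fun e => e.2) := by
  have h1 : pvChildrenB items
      = (pvEdgesB items).foldl (fun c e => c.modify e.1 [] (fun l => l ++ [e.2]))
          PySem.Dict.empty :=
    pvFoldl_nested items (fun p => PySem.List.dedup p.2)
      (fun (c : PySem.Dict String (List String)) parent t =>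
        c.modify parent [] (fun l => l ++ [t])) _
  rw [h1, PySem.Dict.getD_foldl_modify_append]
  simp

lemma pvGetD_stepA (c : PySem.Dict String (List String)) (parent t x : String) :
    ((if c.contains parent then c else c.insert parent ([] : List String)).modify parent []
        (fun l => l ++ [t])).getD x []
      = if x = parent then c.getD x [] ++ [t] else c.getD x [] := by
  by_cases hx : x = parent
  · subst hx
    by_cases hc : c.contains x
    · simp [hc]
    · simp [hc, PySem.Dict.getD_of_not_contains c ([] : List String) (by simpa using hc)]
  · by_cases hc : c.contains parent <;>
      simp [PySem.Dict.getD_modify, hc, hx, PySem.Dict.getD_insert]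

lemma pvGetD_foldA (es : List (String × String)) :
    ∀ (c1 c2 : PySem.Dict String (List String)), (∀ x, c1.getD x [] = c2.getD x []) →
    ∀ x,
    (es.foldl (fun c e =>
        (if c.contains e.1 then c else c.insert e.1 ([] : List String)).modify e.1 []
          (fun l => l ++ [e.2])) c1).getD x []
      = (es.foldl (fun c e => c.modify e.1 [] (fun l => l ++ [e.2])) c2).getD x [] := by
  induction es with
  | nil => exact fun c1 c2 h x => h x
  | cons e t ih =>
    intro c1 c2 h x
    simp only [List.foldl_cons]
    refine ih _ _ (fun y => ?_) x
    rw [pvGetD_stepA, PySem.Dict.getD_modify]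
    by_cases hy : y = e.1 <;> simp [hy, h]

lemma pvGetD_seed (items : List (String × List String)) :
    ∀ (c : PySem.Dict String (List String)), (∀ y, c.getD y [] = ([] : List String)) →
    ∀ x, ((items.foldl (fun c p => c.insert p.1 ([] : List String)) c)).getD x [] = [] := by
  induction items with
  | nil => exact fun c h x => h x
  | cons p t ih =>
    intro c h x
    simp only [List.foldl_cons]
    refine ih _ (fun y => ?_) x
    rw [PySem.Dict.getD_insert]
    by_cases hy : y = p.1 <;> simp [hy, h]

lemma pvChildrenA_getD (items : List (String × List String)) (x : String) :
    (pvChildrenA items).getD x []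
      = ((pvEdges items).filter (fun e => e.1 == x)).map (fun e => e.2) := by
  have h1 : pvChildrenA items
      = (pvEdges items).foldl (fun c e =>
          (if c.contains e.1 then c else c.insert e.1 ([] : List String)).modify e.1 []
            (fun l => l ++ [e.2]))
          (items.foldl (fun c p => c.insert p.1 ([] : List String)) PySem.Dict.empty) :=
    pvFoldl_nested items (fun p => p.2)
      (fun (c : PySem.Dict String (List String)) parent t =>
        (if c.contains parent then c else c.insert parent ([] : List String)).modify parent []
          (fun l => l ++ [t])) _
  rw [h1, pvGetD_foldA (pvEdges items) _ PySem.Dict.empty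
    (fun y => by rw [pvGetD_seed items PySem.Dict.empty (fun z => PySem.Dict.getD_empty z []),
      PySem.Dict.getD_empty]) x]
  rw [PySem.Dict.getD_foldl_modify_append]
  simp

lemma pvFilter_beq_count (l : List String) (x : String) (h : l.count x ≤ 1) :
    l.filter (fun y => y == x) = if x ∈ l then [x] else [] := by
  induction l with
  | nil => simp
  | cons a t ih =>
    rw [List.filter_cons]
    by_cases hax : a = x
    · subst hax
      have ht : t.count a = 0 := by
        rw [List.count_cons] at h
        simp at h
        omega
      have hnt : a ∉ t := List.count_eq_zero.mp ht
      have hfil : t.filter (fun y => y == a) = [] := List.filter_eq_nil_iff.mpr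
        (fun b hb hbeq => hnt ((eq_of_beq hbeq) ▸ hb))
      simp [hfil, hnt]
    · have hcnt : t.count x ≤ 1 := by
        have := @List.count_cons String _ x a t
        simp [show (a == x) = false by simp [hax]] at this
        omega
      rw [if_neg (by simp [hax]), ih hcnt]
      have : (x = a ∨ x ∈ t) ↔ x ∈ t := by
        constructor
        · rintro (rfl | h2)
          · exact absurd rfl hax
          · exact h2
        · exact Or.inr
      simp [this]

-- the reverse-dependency list of x with distinct entries, in task order
def pvCsItems (items : List (String × List String)) (x : String) : List String :=
  (items.filter (fun p => x ∈ p.2)).map (fun p => p.1)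

def pvCs (d : PySem.Dict String (List String)) (x : String) : List String :=
  pvCsItems d.items x

lemma pvEdgesB_filter : ∀ (items : List (String × List String)) (x : String),
    ((pvEdgesB items).filter (fun e => e.1 == x)).map (fun e => e.2) = pvCsItems items x
  | [], x => rfl
  | p :: t, x => by
    simp only [pvEdgesB, List.flatMap_cons, List.filter_append, List.map_append]
    rw [List.filter_map]
    have hcomp : ((fun (e : String × String) => e.1 == x) ∘ (fun parent => (parent, p.1)))
        = (fun y => y == x) := rfl
    rw [hcomp, pvFilter_beq_count (PySem.List.dedup p.2) x
      (List.nodup_iff_count_le_one.mp (PySem.List.nodup_dedup p.2) x)]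
    rw [pvCsItems, List.filter_cons]
    have hrec := pvEdgesB_filter t x
    simp only [pvEdgesB, pvCsItems] at hrec
    by_cases hx : x ∈ p.2
    · have hxd : x ∈ PySem.List.dedup p.2 := (PySem.List.mem_dedup _ _).mpr hx
      rw [if_pos hxd, if_pos (decide_eq_true hx)]
      simp only [List.map_cons, List.map_nil, List.singleton_append]
      rw [hrec]
    · have hxd : x ∉ PySem.List.dedup p.2 := fun hc => hx ((PySem.List.mem_dedup _ _).mp hc)
      rw [if_neg hxd, if_neg (by simp [hx])]
      simp only [List.map_nil, List.nil_append]
      rw [hrec]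

lemma pvChB_eq_cs (items : List (String × List String)) (x : String) :
    (pvChildrenB items).getD x [] = pvCsItems items x := by
  rw [pvChildrenB_getD, pvEdgesB_filter]

-- dedup of A's (per-edge, duplicated) children list is the distinct children list
lemma pvDedup_block (v : String) (b m : List String) (hall : ∀ a ∈ b, a = v) (hne : b ≠ []) :
    pvDedup (b ++ m) = v :: pvDedup (m.filter (fun y => y != v)) := by
  cases b with
  | nil => exact absurd rfl hne
  | cons hd tl =>
    have hhd : hd = v := hall hd List.mem_cons_self
    subst hhd
    rw [List.cons_append, pvDedup_cons, List.filter_append]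
    have h1 : tl.filter (fun y => y != hd) = [] := by
      apply List.filter_eq_nil_iff.mpr
      intro a ha
      have : a = hd := hall a (List.mem_cons_of_mem _ ha)
      simp [this]
    rw [h1, List.nil_append]

lemma pvMem_edgesMap (t : List (String × List String)) (x a : String)
    (h : a ∈ ((pvEdges t).filter (fun e => e.1 == x)).map (fun e => e.2)) :
    ∃ q ∈ t, a = q.1 := by
  rcases List.mem_map.mp h with ⟨e, he, rfl⟩
  rcases List.mem_filter.mp he with ⟨he1, _⟩
  rcases List.mem_flatMap.mp he1 with ⟨q, hq, he2⟩
  rcases List.mem_map.mp he2 with ⟨par, _, rfl⟩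
  exact ⟨q, hq, rfl⟩

lemma pvDedup_csA : ∀ (items : List (String × List String)),
    (items.map (fun p => p.1)).Nodup → ∀ (x : String),
    pvDedup (((pvEdges items).filter (fun e => e.1 == x)).map (fun e => e.2))
      = pvCsItems items x
  | [], _, x => by simp [pvEdges, pvCsItems, pvDedup_nil]
  | p :: t, hk, x => by
    simp only [pvEdges, List.flatMap_cons, List.filter_append, List.map_append]
    have hkt : (t.map (fun p => p.1)).Nodup := (List.nodup_cons.mp hk).2
    have hkp : p.1 ∉ t.map (fun p => p.1) := (List.nodup_cons.mp hk).1
    set bl := (((p.2.map (fun parent => (parent, p.1))).filter (fun e => e.1 == x)).map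
      (fun e => e.2)) with hbl
    have hblall : ∀ a ∈ bl, a = p.1 := by
      intro a ha
      rcases List.mem_map.mp ha with ⟨e, he, rfl⟩
      rcases List.mem_map.mp (List.mem_filter.mp he).1 with ⟨par, _, rfl⟩
      rfl
    rw [pvCsItems, List.filter_cons]
    have hcomp : ((fun (e : String × String) => e.1 == x) ∘ (fun parent => (parent, p.1)))
        = (fun y => y == x) := rfl
    by_cases hx : x ∈ p.2
    · have hbne : bl ≠ [] := by
        intro hcon
        rw [hbl, List.filter_map, hcomp, List.map_eq_nil_iff, List.map_eq_nil_iff] at hcon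
        have := List.filter_eq_nil_iff.mp hcon x hx
        simp at this
      rw [pvDedup_block p.1 bl _ hblall hbne]
      have hmf : (((pvEdges t).filter (fun e => e.1 == x)).map (fun e => e.2)).filter
          (fun y => y != p.1) = ((pvEdges t).filter (fun e => e.1 == x)).map (fun e => e.2) := by
        apply List.filter_eq_self.mpr
        intro a ha
        rcases pvMem_edgesMap t x a ha with ⟨q, hq, rfl⟩
        have : q.1 ≠ p.1 := fun he => hkp (he ▸ List.mem_map_of_mem hq)
        simpa using this
      have hrec := pvDedup_csA t hkt x
      simp only [pvEdges, pvCsItems] at hmf hrec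
      rw [hmf, hrec]
      simp [hx]
    · have hb0 : bl = [] := by
        rw [hbl, List.filter_map, hcomp]
        have h00 : p.2.filter (fun y => y == x) = [] := List.filter_eq_nil_iff.mpr
          (fun b hb hbeq => hx ((eq_of_beq hbeq) ▸ hb))
        simp [h00]
      have hrec := pvDedup_csA t hkt x
      simp only [pvEdges, pvCsItems] at hrec
      rw [hb0, List.nil_append, hrec]
      simp [hx]

lemma pvDedup_chA (d : PySem.Dict String (List String)) (hk : d.keys.Nodup) (x : String) :
    pvDedup ((pvChildrenA d.items).getD x []) = pvCs d x := by
  rw [pvChildrenA_getD, pvDedup_csA d.items hk x]; rfl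

lemma pvCs_nodup (d : PySem.Dict String (List String)) (hk : d.keys.Nodup) (cur : String) :
    (pvCs d cur).Nodup := by
  have hsub : List.Sublist ((d.items.filter (fun p => cur ∈ p.2)).map (fun p => p.1))
      (d.items.map (fun p => p.1)) := (List.filter_sublist).map _
  exact hsub.nodup hk

lemma pvCs_mem (d : PySem.Dict String (List String)) (hk : d.keys.Nodup) (c cur : String) :
    c ∈ pvCs d cur ↔ c ∈ d.keys ∧ cur ∈ d.getD c [] := by
  constructor
  · intro hc
    rcases List.mem_map.mp hc with ⟨p, hp, rfl⟩
    rcases List.mem_filter.mp hp with ⟨hpi, hcur⟩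
    have hkey : p.1 ∈ d.keys := List.mem_map_of_mem hpi
    have hget : d.getD p.1 [] = p.2 :=
      PySem.Dict.getD_of_mem_items d (by exact hpi) hk []
    exact ⟨hkey, by rw [hget]; exact of_decide_eq_true hcur⟩
  · rintro ⟨hkey, hcur⟩
    rcases List.mem_map.mp hkey with ⟨p, hp, rfl⟩
    have hget : d.getD p.1 [] = p.2 := PySem.Dict.getD_of_mem_items d (by exact hp) hk []
    refine List.mem_map.mpr ⟨p, List.mem_filter.mpr ⟨hp, ?_⟩, rfl⟩
    rw [hget] at hcur
    exact decide_eq_true hcur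

lemma pvMem_chA (d : PySem.Dict String (List String)) (hk : d.keys.Nodup) (x c : String) :
    c ∈ (pvChildrenA d.items).getD x [] ↔ c ∈ d.keys ∧ x ∈ d.getD c [] := by
  rw [← mem_pvDedup, pvDedup_chA d hk x]
  exact pvCs_mem d hk c x

lemma pvLen_chA (items : List (String × List String)) (x : String) :
    ((pvChildrenA items).getD x []).length ≤ (items.map (fun p => p.2.length)).sum := by
  rw [pvChildrenA_getD, List.length_map]
  calc ((pvEdges items).filter (fun e => e.1 == x)).length
      ≤ (pvEdges items).length := List.length_filter_le _ _
    _ = (items.map (fun p => p.2.length)).sum := by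
        rw [pvEdges, List.length_flatMap]
        congr 1
        apply List.map_congr_left
        intro p _
        exact List.length_map ..


-- ===== the inner "insert all newly ready children" fold, characterized =====
def pvVal (d : PySem.Dict String (List String)) (L : PySem.Dict String Int) (c : String) : Int :=
  (PySem.List.max? ((d.getD c []).map (fun p => L.getD p 0)) id).getD 0 + 1

def pvG (d : PySem.Dict String (List String)) (L : PySem.Dict String Int)
    (cs : List String) : PySem.Dict String Int :=
  cs.foldl (fun L c => L.insert c (pvVal d L c)) L

lemma pvG_nil (d : PySem.Dict String (List String)) (L : PySem.Dict String Int) :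
    pvG d L [] = L := rfl
lemma pvG_cons (d : PySem.Dict String (List String)) (L : PySem.Dict String Int)
    (c : String) (cs : List String) :
    pvG d L (c :: cs) = pvG d (L.insert c (pvVal d L c)) cs := rfl

-- what A's inner loop appends to the queue: exactly the children that pass the readiness test
lemma pvFoldA_app (d : PySem.Dict String (List String)) (P' : PySem.Set String) :
    ∀ (cs : List String) (L : PySem.Dict String Int) (app : List String),
    (cs.foldl
      (fun (acc : PySem.Dict String Int × List String) child =>
        let parents := d.getD child []
        if parents.all (fun p => PySem.Set.contains P' p) then
          let parent_levels := parents.map (fun p => acc.1.getD p 0)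
          (acc.1.insert child ((PySem.List.max? parent_levels id).getD 0 + 1), acc.2 ++ [child])
        else acc)
      (L, app)).2
      = app ++ cs.filter (fun c => (d.getD c []).all (fun p => PySem.Set.contains P' p)) := by
  intro cs
  induction cs with
  | nil => intro L app; simp
  | cons c t ih =>
    intro L app
    simp only [List.foldl_cons, List.filter_cons]
    by_cases hc : (d.getD c []).all (fun p => PySem.Set.contains P' p) = true
    · simp only [hc, if_true]
      rw [ih]
      simp
    · simp only [hc, Bool.false_eq_true, if_false]
      rw [ih]

-- and its levels component is the pvG fold over the same filtered list
lemma pvFoldA_L (d : PySem.Dict String (List String)) (P' : PySem.Set String) :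
    ∀ (cs : List String) (L : PySem.Dict String Int) (app : List String),
    (cs.foldl
      (fun (acc : PySem.Dict String Int × List String) child =>
        let parents := d.getD child []
        if parents.all (fun p => PySem.Set.contains P' p) then
          let parent_levels := parents.map (fun p => acc.1.getD p 0)
          (acc.1.insert child ((PySem.List.max? parent_levels id).getD 0 + 1), acc.2 ++ [child])
        else acc)
      (L, app)).1
      = pvG d L (cs.filter (fun c => (d.getD c []).all (fun p => PySem.Set.contains P' p))) := by
  intro cs
  induction cs with
  | nil => intro L app; rfl
  | cons c t ih =>
    intro L app
    simp only [List.foldl_cons, List.filter_cons]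
    by_cases hc : (d.getD c []).all (fun p => PySem.Set.contains P' p) = true
    · simp only [hc, if_true]
      rw [ih, pvG_cons]
      rfl
    · simp only [hc, Bool.false_eq_true, if_false]
      exact ih L app

-- hypotheses under which the fold is characterized: values are stable, re-inserts are no-ops,
-- keys not yet levelled are parents of nobody being levelled
def pvGH (d : PySem.Dict String (List String)) (v : String → Int)
    (cs : List String) (L : PySem.Dict String Int) : Prop :=
  L.keys.Nodup ∧
  (∀ c ∈ cs, pvVal d L c = v c) ∧
  (∀ c ∈ cs, c ∈ L.keys → L.getD c 0 = v c) ∧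
  (∀ c1 ∈ cs, ∀ c2 ∈ cs, c1 ∉ L.keys → c1 ∉ d.getD c2 [])

lemma pvGH_mono (d : PySem.Dict String (List String)) (v : String → Int)
    (cs cs2 : List String) (L : PySem.Dict String Int)
    (h2 : ∀ a ∈ cs2, a ∈ cs) (h : pvGH d v cs L) : pvGH d v cs2 L :=
  ⟨h.1, fun c hc => h.2.1 c (h2 c hc), fun c hc => h.2.2.1 c (h2 c hc),
   fun c1 h1 c2 hc2 => h.2.2.2 c1 (h2 c1 h1) c2 (h2 c2 hc2)⟩

lemma pvGH_step (d : PySem.Dict String (List String)) (v : String → Int)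
    (c : String) (cs' : List String) (L : PySem.Dict String Int)
    (h : pvGH d v (c :: cs') L) : pvGH d v cs' (L.insert c (v c)) := by
  obtain ⟨hnd, hv, hold, hfresh⟩ := h
  refine ⟨PySem.Dict.nodup_keys_insert L c (v c) hnd, ?_, ?_, ?_⟩
  · intro c2 hc2
    have hmap : ((d.getD c2 []).map (fun p => (L.insert c (v c)).getD p 0))
         = ((d.getD c2 []).map (fun p => L.getD p 0)) := by
      apply List.map_congr_left
      intro p hp
      rw [PySem.Dict.getD_insert]
      by_cases hpc : p = c
      · subst hpc
        have hpk : p ∈ L.keys := by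
          by_contra hnk
          exact (hfresh p List.mem_cons_self c2 (List.mem_cons_of_mem _ hc2) hnk) hp
        rw [if_pos rfl, hold p List.mem_cons_self hpk]
      · rw [if_neg hpc]
    have h2 := hv c2 (List.mem_cons_of_mem _ hc2)
    unfold pvVal at h2 ⊢
    rw [hmap, h2]
  · intro c2 hc2 hk2
    rw [PySem.Dict.getD_insert]
    by_cases hc2c : c2 = c
    · simp [hc2c]
    · rw [if_neg hc2c]
      have : c2 ∈ L.keys := by
        rcases (PySem.Dict.mem_keys_insert L c c2 (v c)).mp hk2 with h | h
        · exact absurd h hc2c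
        · exact h
      exact hold c2 (List.mem_cons_of_mem _ hc2) this
  · intro c1 h1 c2 h2 hnk
    have : c1 ∉ L.keys := fun hm => hnk ((PySem.Dict.mem_keys_insert L c c1 (v c)).mpr (Or.inr hm))
    exact hfresh c1 (List.mem_cons_of_mem _ h1) c2 (List.mem_cons_of_mem _ h2) this

lemma pvG_g (d : PySem.Dict String (List String)) (v : String → Int) :
    ∀ (cs : List String) (L : PySem.Dict String Int), pvGH d v cs L →
    ∀ t, (pvG d L cs).getD t 0 = if t ∈ cs then v t else L.getD t 0
  | [], L, _, t => by simp [pvG_nil]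
  | c :: cs', L, h, t => by
    rw [pvG_cons, h.2.1 c List.mem_cons_self,
      pvG_g d v cs' (L.insert c (v c)) (pvGH_step d v c cs' L h) t]
    by_cases ht : t ∈ cs'
    · simp [ht]
    · rw [PySem.Dict.getD_insert]
      by_cases htc : t = c
      · subst htc; simp [ht]
      · simp [ht, htc]

lemma pvG_noop (d : PySem.Dict String (List String)) :
    ∀ (cs : List String) (L : PySem.Dict String Int), L.keys.Nodup →
    (∀ c ∈ cs, L.get? c = some (pvVal d L c)) → pvG d L cs = L
  | [], _, _, _ => rfl
  | c :: cs', L, hnd, h => by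
    rw [pvG_cons, pvInsert_noop L c (pvVal d L c) hnd (h c List.mem_cons_self)]
    exact pvG_noop d cs' L hnd (fun c2 hc2 => h c2 (List.mem_cons_of_mem _ hc2))

lemma pvG_dropc (d : PySem.Dict String (List String)) (v : String → Int) (c : String)
    (cs : List String) :
    ∀ L, pvGH d v cs L → L.get? c = some (v c) →
    pvG d L cs = pvG d L (cs.filter (fun y => y != c)) := by
  induction cs with
  | nil => intro L _ _; rfl
  | cons a cs' ih =>
    intro L h hg
    rw [List.filter_cons]
    by_cases hac : a = c
    · subst hac
      have hnoop : L.insert a (pvVal d L a) = L := by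
        rw [h.2.1 a List.mem_cons_self]
        exact pvInsert_noop L a (v a) h.1 hg
      rw [pvG_cons, hnoop, if_neg (by simp)]
      exact ih L (pvGH_mono d v _ _ L (fun x hx => List.mem_cons_of_mem _ hx) h) hg
    · rw [if_pos (by simp [hac]), pvG_cons, pvG_cons, h.2.1 a List.mem_cons_self]
      exact ih (L.insert a (v a)) (pvGH_step d v a cs' L h)
        (by rw [PySem.Dict.get?_insert, if_neg (fun he => hac he.symm)]; exact hg)

lemma pvG_e (d : PySem.Dict String (List String)) (v : String → Int) :
    ∀ (cs : List String) (L : PySem.Dict String Int), pvGH d v cs L →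
    pvG d L cs = pvG d L (pvDedup cs)
  | [], L, _ => by rw [pvDedup_nil]
  | c :: cs', L, h => by
    rw [pvDedup_cons, pvG_cons, pvG_cons, h.2.1 c List.mem_cons_self]
    have hstep := pvGH_step d v c cs' L h
    have hg : (L.insert c (v c)).get? c = some (v c) := PySem.Dict.get?_insert_self L c (v c)
    calc pvG d (L.insert c (v c)) cs'
        = pvG d (L.insert c (v c)) (cs'.filter (fun y => y != c)) :=
          pvG_dropc d v c cs' _ hstep hg
      _ = pvG d (L.insert c (v c)) (pvDedup (cs'.filter (fun y => y != c))) :=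
          pvG_e d v (cs'.filter (fun y => y != c)) _
            (pvGH_mono d v cs' _ _ (fun x hx => (List.mem_filter.mp hx).1) hstep)
termination_by cs _ _ => cs.length
decreasing_by simpa using Nat.lt_succ_of_le (List.length_filter_le _ _)

lemma pvG_keys (d : PySem.Dict String (List String)) (L : PySem.Dict String Int)
    (cs : List String) :
    (pvG d L cs).keys
      = L.keys ++ pvDedup (cs.filter (fun c => !(PySem.Set.contains L.keys c))) := by
  rw [pvG, PySem.Dict.keys_foldl_insert cs (fun L c => pvVal d L c) L, pvSet_update_eq]

-- ===== stage 2: the set-based reference loop equals B's counter loop, in lockstep =====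
-- distinct unprocessed-parent count of task c (B keeps it explicitly as a counter)
def pvCnt (d : PySem.Dict String (List String)) (P : PySem.Set String) (c : String) : Nat :=
  ((pvDedup (d.getD c [])).filter (fun p => !(PySem.Set.contains P p))).length

lemma pvCountP_split (l : List String) (p : String → Bool) :
    l.countP p + l.countP (fun a => !(p a)) = l.length := by
  induction l with
  | nil => simp
  | cons a t ih => by_cases h : p a <;> simp [h] <;> omega

lemma pvCnt_drop (d : PySem.Dict String (List String)) (P : PySem.Set String) (cur c : String)
    (hmem : cur ∈ d.getD c []) (hP : cur ∉ P) :
    pvCnt d P c = pvCnt d (PySem.Set.add P cur) c + 1 := by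
  unfold pvCnt
  have hc1 : (pvDedup (d.getD c [])).count cur = 1 := by
    have h1 := List.nodup_iff_count_le_one.mp (nodup_pvDedup (d.getD c [])) cur
    have h2 := List.count_pos_iff.mpr ((mem_pvDedup _ cur).mpr hmem)
    omega
  have h1 : (pvDedup (d.getD c [])).filter (fun p => !(PySem.Set.contains (PySem.Set.add P cur) p))
      = ((pvDedup (d.getD c [])).filter (fun p => !(PySem.Set.contains P p))).filter
          (fun p => p != cur) := by
    rw [List.filter_filter]
    apply List.filter_congr
    intro p _
    by_cases hpc : p = cur
    · subst hpc; simp [pysem, PySem.Set.mem_add]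
    · by_cases hpP : p ∈ P <;> simp [pysem, PySem.Set.mem_add, hpc, hpP]
  rw [h1]
  have hcl : ((pvDedup (d.getD c [])).filter (fun p => !(PySem.Set.contains P p))).count cur = 1 := by
    rw [List.count_filter (by simp [pysem, hP])]
    exact hc1
  set l := (pvDedup (d.getD c [])).filter (fun p => !(PySem.Set.contains P p)) with hl
  have hsplit : l.countP (fun p => p == cur) + l.countP (fun p => !(p == cur)) = l.length :=
    pvCountP_split l (fun p => p == cur)
  have hcount : l.countP (fun p => p == cur) = 1 := hcl
  have hfil : (l.filter (fun p => p != cur)).length = l.countP (fun p => !(p == cur)) := by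
    rw [← List.countP_eq_length_filter]
    apply List.countP_congr
    intro a _
    simp [bne]
  omega

-- readiness of a task: all parents already processed (the condition the reference loop tests)
lemma pvReady_iff (d : PySem.Dict String (List String)) (P' : PySem.Set String) (c : String) :
    ((d.getD c []).all (fun p => PySem.Set.contains P' p) = true)
      ↔ ∀ p ∈ d.getD c [], p ∈ P' := by
  rw [List.all_eq_true]
  constructor
  · intro h p hp; exact (PySem.Set.contains_iff P' p).mp (h p hp)
  · intro h p hp; exact (PySem.Set.contains_iff P' p).mpr (h p hp)

lemma pvCnt_zero_iff (d : PySem.Dict String (List String)) (P' : PySem.Set String) (c : String) :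
    pvCnt d P' c = 0 ↔ ∀ p ∈ d.getD c [], p ∈ P' := by
  unfold pvCnt
  rw [List.length_eq_zero_iff, List.filter_eq_nil_iff]
  constructor
  · intro h p hp
    have := h p ((mem_pvDedup _ p).mpr hp)
    simpa [PySem.Set.contains_iff] using this
  · intro h p hp
    have hmem := h p ((mem_pvDedup _ p).mp hp)
    simpa using hmem

lemma pvCnt_stable (d : PySem.Dict String (List String)) (P : PySem.Set String) (cur c : String)
    (h : cur ∉ d.getD c []) : pvCnt d (PySem.Set.add P cur) c = pvCnt d P c := by
  unfold pvCnt
  congr 1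
  apply List.filter_congr
  intro p hp
  have hpc : p ≠ cur := fun he => h (he ▸ (mem_pvDedup _ p).mp hp)
  by_cases hpP : p ∈ P <;> simp [pysem, PySem.Set.mem_add, hpc, hpP]

-- Python's running max 'lvl = 0; for p in parents: lvl = max(lvl, levels[p])' computes
-- the same value as the reference's max? over the (nonnegative) parent levels
lemma pvMaxsome : ∀ (l : List Int) (x : Int),
    PySem.List.max? (x :: l) id = some (l.foldl max x)
  | [], _ => rfl
  | y :: l, x => by
    have h0 : PySem.List.max? (x :: y :: l) id = PySem.List.max? (max x y :: l) id := by
      unfold PySem.List.max?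
      simp only [List.foldl_cons, id_eq]
      congr 1
      by_cases h : x < y
      · rw [if_pos h, max_eq_right (le_of_lt h)]
      · rw [if_neg h, max_eq_left (not_lt.mp h)]
    rw [h0, pvMaxsome l (max x y)]
    rw [List.foldl_cons]

lemma pvMax_nonneg (l : List Int) (h : ∀ v ∈ l, 0 ≤ v) :
    0 ≤ (PySem.List.max? l id).getD 0 := by
  cases l with
  | nil => simp [PySem.List.max?]
  | cons x t =>
    rw [pvMaxsome]
    exact le_trans (h x List.mem_cons_self) (PySem.List.le_foldl_max t x).1

lemma pvFoldMax_eq (l : List Int) (h : ∀ v ∈ l, 0 ≤ v) :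
    l.foldl max 0 = (PySem.List.max? l id).getD 0 := by
  cases l with
  | nil => simp [PySem.List.max?]
  | cons x t =>
    rw [pvMaxsome, Option.getD_some, List.foldl_cons,
      max_eq_right (h x List.mem_cons_self)]

-- lockstep of the two inner loops: same levels, same appended children, the
-- distinct-parent counters track the unprocessed-parent counts, and level
-- values stay nonnegative
lemma pvInner (d : PySem.Dict String (List String)) (P : PySem.Set String) (cur : String)
    (hcurP : cur ∉ P) :
    ∀ (cs : List String) (L D : PySem.Dict String Int) (app : List String),
    cs.Nodup →
    (∀ c ∈ cs, cur ∈ d.getD c []) →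
    (∀ c ∈ cs, D.getD c 0 = (pvCnt d P c : Int)) →
    (∀ t0, 0 ≤ L.getD t0 0) →
    (cs.foldl
      (fun (acc : PySem.Dict String Int × PySem.Dict String Int × List String) child =>
        let rem := acc.2.1.modify child 0 (fun v => v - 1)
        if rem.getD child 0 == 0 then
          (acc.1.insert child
             ((d.getD child []).foldl (fun lvl p => max lvl (acc.1.getD p 0)) 0 + 1),
           rem, acc.2.2 ++ [child])
        else (acc.1, rem, acc.2.2))
      (L, D, app)).1
      = (cs.foldl
      (fun (acc : PySem.Dict String Int × List String) child =>
        let parents := d.getD child []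
        if parents.all (fun p => PySem.Set.contains (PySem.Set.add P cur) p) then
          let parent_levels := parents.map (fun p => acc.1.getD p 0)
          (acc.1.insert child ((PySem.List.max? parent_levels id).getD 0 + 1), acc.2 ++ [child])
        else acc)
      (L, app)).1
    ∧ (cs.foldl
      (fun (acc : PySem.Dict String Int × PySem.Dict String Int × List String) child =>
        let rem := acc.2.1.modify child 0 (fun v => v - 1)
        if rem.getD child 0 == 0 then
          (acc.1.insert child
             ((d.getD child []).foldl (fun lvl p => max lvl (acc.1.getD p 0)) 0 + 1),
           rem, acc.2.2 ++ [child])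
        else (acc.1, rem, acc.2.2))
      (L, D, app)).2.2
      = (cs.foldl
      (fun (acc : PySem.Dict String Int × List String) child =>
        let parents := d.getD child []
        if parents.all (fun p => PySem.Set.contains (PySem.Set.add P cur) p) then
          let parent_levels := parents.map (fun p => acc.1.getD p 0)
          (acc.1.insert child ((PySem.List.max? parent_levels id).getD 0 + 1), acc.2 ++ [child])
        else acc)
      (L, app)).2
    ∧ (∀ c, c ∉ cs →
        (cs.foldl
          (fun (acc : PySem.Dict String Int × PySem.Dict String Int × List String) child =>
            let rem := acc.2.1.modify child 0 (fun v => v - 1)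
            if rem.getD child 0 == 0 then
              (acc.1.insert child
                 ((d.getD child []).foldl (fun lvl p => max lvl (acc.1.getD p 0)) 0 + 1),
               rem, acc.2.2 ++ [child])
            else (acc.1, rem, acc.2.2))
          (L, D, app)).2.1.getD c 0 = D.getD c 0)
    ∧ (∀ c ∈ cs,
        (cs.foldl
          (fun (acc : PySem.Dict String Int × PySem.Dict String Int × List String) child =>
            let rem := acc.2.1.modify child 0 (fun v => v - 1)
            if rem.getD child 0 == 0 then
              (acc.1.insert child
                 ((d.getD child []).foldl (fun lvl p => max lvl (acc.1.getD p 0)) 0 + 1),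
               rem, acc.2.2 ++ [child])
            else (acc.1, rem, acc.2.2))
          (L, D, app)).2.1.getD c 0 = (pvCnt d (PySem.Set.add P cur) c : Int))
    ∧ (∀ t0, 0 ≤
        ((cs.foldl
          (fun (acc : PySem.Dict String Int × List String) child =>
            let parents := d.getD child []
            if parents.all (fun p => PySem.Set.contains (PySem.Set.add P cur) p) then
              let parent_levels := parents.map (fun p => acc.1.getD p 0)
              (acc.1.insert child ((PySem.List.max? parent_levels id).getD 0 + 1), acc.2 ++ [child])
            else acc)
          (L, app)).1).getD t0 0) := by
  intro cs
  induction cs with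
  | nil =>
    intro L D app _ _ _ hLnn
    exact ⟨rfl, rfl, fun c _ => rfl, by simp, hLnn⟩
  | cons c t ih =>
    intro L D app hnd hmem hD hLnn
    have hct : c ∉ t := (List.nodup_cons.mp hnd).1
    have hndt : t.Nodup := (List.nodup_cons.mp hnd).2
    have hcnt : pvCnt d P c = pvCnt d (PySem.Set.add P cur) c + 1 :=
      pvCnt_drop d P cur c (hmem c List.mem_cons_self) hcurP
    have hD1 : (D.modify c 0 (fun v => v - 1)).getD c 0
        = (pvCnt d (PySem.Set.add P cur) c : Int) := by
      rw [PySem.Dict.getD_modify_self, hD c List.mem_cons_self, hcnt]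
      push_cast
      ring
    have hcond : ((d.getD c []).all (fun p => PySem.Set.contains (PySem.Set.add P cur) p))
        = ((D.modify c 0 (fun v => v - 1)).getD c 0 == 0) := by
      rw [hD1]
      by_cases hr : ∀ p ∈ d.getD c [], p ∈ PySem.Set.add P cur
      · rw [(pvReady_iff d _ c).mpr hr]
        have : pvCnt d (PySem.Set.add P cur) c = 0 := (pvCnt_zero_iff d _ c).mpr hr
        simp [this]
      · have h1 : ¬ ((d.getD c []).all (fun p => PySem.Set.contains (PySem.Set.add P cur) p) = true) :=
          fun h => hr ((pvReady_iff d _ c).mp h)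
        have h2 : pvCnt d (PySem.Set.add P cur) c ≠ 0 :=
          fun h => hr ((pvCnt_zero_iff d _ c).mp h)
        rw [Bool.eq_false_iff.mpr h1]
        symm
        simp [h2]
    have hDt : ∀ c' ∈ t, (D.modify c 0 (fun v => v - 1)).getD c' 0 = (pvCnt d P c' : Int) := by
      intro c' hc'
      have : c' ≠ c := fun he => hct (he ▸ hc')
      rw [PySem.Dict.getD_modify, if_neg this]
      exact hD c' (List.mem_cons_of_mem _ hc')
    have hmemt : ∀ c' ∈ t, cur ∈ d.getD c' [] :=
      fun c' hc' => hmem c' (List.mem_cons_of_mem _ hc')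
    -- the running max equals the reference's max? over the parent levels
    have hnnvals : ∀ v ∈ (d.getD c []).map (fun p => L.getD p 0), 0 ≤ v := by
      intro v hv
      rcases List.mem_map.mp hv with ⟨p, _, rfl⟩
      exact hLnn p
    have hveq : (d.getD c []).foldl (fun lvl p => max lvl (L.getD p 0)) 0
        = (PySem.List.max? ((d.getD c []).map (fun p => L.getD p 0)) id).getD 0 := by
      rw [← pvFoldMax_eq _ hnnvals, List.foldl_map]
    have hmaxnn : 0 ≤ (PySem.List.max? ((d.getD c []).map (fun p => L.getD p 0)) id).getD 0 :=
      pvMax_nonneg _ hnnvals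
    have hLnn' : ∀ t0, 0 ≤ (L.insert c
        ((PySem.List.max? ((d.getD c []).map (fun p => L.getD p 0)) id).getD 0 + 1)).getD t0 0 := by
      intro t0
      rw [PySem.Dict.getD_insert]
      by_cases ht0 : t0 = c
      · rw [if_pos ht0]; omega
      · rw [if_neg ht0]; exact hLnn t0
    simp only [List.foldl_cons]
    by_cases hready : (d.getD c []).all (fun p => PySem.Set.contains (PySem.Set.add P cur) p) = true
    · have hcond2 : ((D.modify c 0 (fun v => v - 1)).getD c 0 == 0) = true := hcond ▸ hready
      simp only [hready, hcond2, if_true]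
      rw [hveq]
      rcases ih (L.insert c ((PySem.List.max? ((d.getD c []).map (fun p => L.getD p 0)) id).getD 0 + 1))
        (D.modify c 0 (fun v => v - 1)) (app ++ [c]) hndt hmemt hDt hLnn' with ⟨e1, e2, e3, e4, e5⟩
      refine ⟨e1, e2, ?_, ?_, e5⟩
      · intro c0 hc0
        have hc0t : c0 ∉ t := fun h => hc0 (List.mem_cons_of_mem _ h)
        have hc0c : c0 ≠ c := fun he => hc0 (he ▸ List.mem_cons_self)
        rw [e3 c0 hc0t, PySem.Dict.getD_modify, if_neg hc0c]
      · intro c0 hc0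
        rcases List.mem_cons.mp hc0 with rfl | hc0t
        · rw [e3 c0 hct, hD1]
        · exact e4 c0 hc0t
    · have hcond2 : ((D.modify c 0 (fun v => v - 1)).getD c 0 == 0) = false :=
        hcond ▸ Bool.eq_false_iff.mpr hready
      simp only [hready, hcond2, if_false, Bool.false_eq_true]
      rcases ih L (D.modify c 0 (fun v => v - 1)) app hndt hmemt hDt hLnn with ⟨e1, e2, e3, e4, e5⟩
      refine ⟨e1, e2, ?_, ?_, e5⟩
      · intro c0 hc0
        have hc0t : c0 ∉ t := fun h => hc0 (List.mem_cons_of_mem _ h)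
        have hc0c : c0 ≠ c := fun he => hc0 (he ▸ List.mem_cons_self)
        rw [e3 c0 hc0t, PySem.Dict.getD_modify, if_neg hc0c]
      · intro c0 hc0
        rcases List.mem_cons.mp hc0 with rfl | hc0t
        · rw [e3 c0 hct, hD1]
        · exact e4 c0 hc0t

-- lockstep of the reference while-loop (set-based, dedup'd children) with B's while-loop
lemma pvLoop_eq (d ch : PySem.Dict String (List String))
    (hk : d.keys.Nodup)
    (hch : ∀ x ∈ d.keys, ch.getD x [] = pvCs d x) :
    ∀ (fuel : Nat) (q : List String) (L : PySem.Dict String Int) (P : PySem.Set String)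
      (D : PySem.Dict String Int),
    (∀ x ∈ q, x ∈ d.keys) → q.Nodup → (∀ x ∈ q, x ∉ P) →
    (∀ c ∈ d.keys, D.getD c 0 = (pvCnt d P c : Int)) →
    (∀ x ∈ q, ∀ p ∈ d.getD x [], p ∈ P) →
    (∀ x ∈ P, ∀ p ∈ d.getD x [], p ∈ P) →
    (∀ t0, 0 ≤ L.getD t0 0) →
    pvLoopA d ch fuel q L P = pvLoopB d ch fuel q L D := by
  intro fuel
  induction fuel with
  | zero => intro q L P D _ _ _ _ _ _ _; rfl
  | succ f ih =>
    intro q L P D h1 h2 h3 h4 h5 h6 h7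
    cases q with
    | nil => rfl
    | cons cur rest =>
      have hcurk : cur ∈ d.keys := h1 cur List.mem_cons_self
      have hcurP : cur ∉ P := h3 cur List.mem_cons_self
      have hcr : cur ∉ rest := (List.nodup_cons.mp h2).1
      have hrnd : rest.Nodup := (List.nodup_cons.mp h2).2
      have hcsnd : (pvCs d cur).Nodup := pvCs_nodup d hk cur
      have hcsmem : ∀ c ∈ pvCs d cur, cur ∈ d.getD c [] :=
        fun c hc => ((pvCs_mem d hk c cur).mp hc).2
      have hcskeys : ∀ c ∈ pvCs d cur, c ∈ d.keys :=
        fun c hc => ((pvCs_mem d hk c cur).mp hc).1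
      have hDcs : ∀ c ∈ pvCs d cur, D.getD c 0 = (pvCnt d P c : Int) :=
        fun c hc => h4 c (hcskeys c hc)
      obtain ⟨e1, e2, e3, e4, e5⟩ :=
        pvInner d P cur hcurP (pvCs d cur) L D [] hcsnd hcsmem hDcs h7
      show pvLoopA d ch f
          (rest ++ ((ch.getD cur []).foldl _ (L, ([] : List String))).2) _ _
        = pvLoopB d ch f _ _ _
      rw [hch cur hcurk]
      rw [e1, e2]
      have happ : ((pvCs d cur).foldl
          (fun (acc : PySem.Dict String Int × List String) child =>
            let parents := d.getD child []
            if parents.all (fun p => PySem.Set.contains (PySem.Set.add P cur) p) then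
              let parent_levels := parents.map (fun p => acc.1.getD p 0)
              (acc.1.insert child ((PySem.List.max? parent_levels id).getD 0 + 1), acc.2 ++ [child])
            else acc)
          (L, ([] : List String))).2
          = (pvCs d cur).filter
              (fun c => (d.getD c []).all (fun p => PySem.Set.contains (PySem.Set.add P cur) p)) := by
        simpa using pvFoldA_app d (PySem.Set.add P cur) (pvCs d cur) L []
      set app := ((pvCs d cur).foldl
          (fun (acc : PySem.Dict String Int × List String) child =>
            let parents := d.getD child []
            if parents.all (fun p => PySem.Set.contains (PySem.Set.add P cur) p) then
              let parent_levels := parents.map (fun p => acc.1.getD p 0)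
              (acc.1.insert child ((PySem.List.max? parent_levels id).getD 0 + 1), acc.2 ++ [child])
            else acc)
          (L, ([] : List String))).2 with happdef
      have happmem : ∀ c ∈ app, c ∈ pvCs d cur ∧ ∀ p ∈ d.getD c [], p ∈ PySem.Set.add P cur := by
        intro c hc
        rw [happ] at hc
        rcases List.mem_filter.mp hc with ⟨hc1, hc2⟩
        exact ⟨hc1, (pvReady_iff d _ c).mp hc2⟩
      apply ih
      · intro x hx
        rcases List.mem_append.mp hx with hx | hx
        · exact h1 x (List.mem_cons_of_mem _ hx)
        · exact hcskeys x (happmem x hx).1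
      · rw [List.nodup_append]
        refine ⟨hrnd, ?_, ?_⟩
        · rw [happ]; exact hcsnd.filter _
        · intro a ha b hb heq
          subst heq
          have hpa : ∀ p ∈ d.getD a [], p ∈ P := h5 a (List.mem_cons_of_mem _ ha)
          exact hcurP (hpa cur (hcsmem a (happmem a hb).1))
      · intro x hx0
        rcases List.mem_append.mp hx0 with hx1 | hx1
        · intro hmem
          rcases (PySem.Set.mem_add P cur x).mp hmem with h | heq
          · exact h3 x (List.mem_cons_of_mem _ hx1) h
          · exact hcr (heq ▸ hx1)
        · intro hmem
          have hcx : cur ∈ d.getD x [] := hcsmem x (happmem x hx1).1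
          rcases (PySem.Set.mem_add P cur x).mp hmem with h | heq
          · exact hcurP (h6 x h cur hcx)
          · rw [heq] at hcx
            exact hcurP (h5 cur List.mem_cons_self cur hcx)
      · intro c hck
        by_cases hccs : c ∈ pvCs d cur
        · exact e4 c hccs
        · rw [e3 c hccs, h4 c hck]
          have : cur ∉ d.getD c [] :=
            fun hcur2 => hccs ((pvCs_mem d hk c cur).mpr ⟨hck, hcur2⟩)
          exact_mod_cast congrArg (Nat.cast (R := Int)) (pvCnt_stable d P cur c this).symm
      · intro x hx
        rcases List.mem_append.mp hx with hx | hx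
        · intro p hp
          exact (PySem.Set.mem_add P cur p).mpr (Or.inl (h5 x (List.mem_cons_of_mem _ hx) p hp))
        · exact (happmem x hx).2
      · intro x hx p hp
        rcases (PySem.Set.mem_add P cur x).mp hx with h | heq
        · exact (PySem.Set.mem_add P cur p).mpr (Or.inl (h6 x h p hp))
        · rw [heq] at hp
          exact (PySem.Set.mem_add P cur p).mpr (Or.inl (h5 cur List.mem_cons_self p hp))
      · exact e5

-- ===== stage 1: A's loop (with duplicate/garbage queue entries) equals the reference loop =====
lemma pvContains_true (P : PySem.Set String) (x : String) (h : x ∈ P) :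
    PySem.Set.contains P x = true := (PySem.Set.contains_iff P x).mpr h

lemma pvContains_false (P : PySem.Set String) (x : String) (h : x ∉ P) :
    PySem.Set.contains P x = false := by
  by_contra hx
  exact h ((PySem.Set.contains_iff P x).mp (by revert hx; cases PySem.Set.contains P x <;> simp))

-- the "essential" queue: first copies of the not-yet-processed entries, in order
def pvEss (q : List String) (P : PySem.Set String) : List String :=
  pvDedup (q.filter (fun x => !(PySem.Set.contains P x)))

lemma pvEss_nil (P : PySem.Set String) : pvEss [] P = [] := by
  simp [pvEss, pvDedup_nil]

lemma pvEss_cons_mem (q : List String) (P : PySem.Set String) (x : String) (h : x ∈ P) :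
    pvEss (x :: q) P = pvEss q P := by
  unfold pvEss
  rw [List.filter_cons, pvContains_true P x h]
  simp

lemma pvEss_cons_not_mem (q : List String) (P : PySem.Set String) (x : String) (h : x ∉ P) :
    pvEss (x :: q) P = x :: pvEss q (PySem.Set.add P x) := by
  unfold pvEss
  rw [List.filter_cons, pvContains_false P x h]
  simp only [Bool.not_false, if_pos, pvDedup_cons]
  congr 1
  have hfil : (q.filter (fun y => !(PySem.Set.contains P y))).filter (fun y => y != x)
      = q.filter (fun y => !(PySem.Set.contains (PySem.Set.add P x) y)) := by
    rw [List.filter_filter]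
    apply List.filter_congr
    intro a _
    by_cases hax : a = x
    · subst hax
      simp
    · by_cases haP : a ∈ P
      · simp [hax]
      · have hnadd : a ∉ PySem.Set.add P x := fun hm => by
          rcases (PySem.Set.mem_add P x a).mp hm with h1 | h1
          · exact haP h1
          · exact hax h1
        simp [hax]
  rw [hfil]

lemma pvEss_append_absorb (q l2 : List String) (P : PySem.Set String)
    (h : ∀ c ∈ l2, c ∈ P ∨ c ∈ q) :
    pvEss (q ++ l2) P = pvEss q P := by
  unfold pvEss
  rw [List.filter_append]
  apply pvDedup_append_subset
  intro a ha
  rcases List.mem_filter.mp ha with ⟨ha1, ha2⟩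
  rcases h a ha1 with h1 | h1
  · rw [pvContains_true P a h1] at ha2
    simp at ha2
  · exact List.mem_filter.mpr ⟨h1, ha2⟩

lemma pvEss_append_fresh (q l2 : List String) (P : PySem.Set String)
    (h1 : ∀ c ∈ l2, c ∉ P) (h2 : ∀ c ∈ l2, c ∉ q) :
    pvEss (q ++ l2) P = pvEss q P ++ pvDedup l2 := by
  unfold pvEss
  rw [List.filter_append]
  have hf : l2.filter (fun y => !(PySem.Set.contains P y)) = l2 :=
    List.filter_eq_self.mpr (fun a ha => by simpa using h1 a ha)
  rw [hf]
  apply pvDedup_append_disjoint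
  intro a ha hmem
  exact h2 a ha (List.mem_filter.mp hmem).1

-- the potential that bounds the number of pops A still makes
def pvPhi (N W : Nat) (ks q : List String) : Nat :=
  (q.map (fun x => W ^ (N - ks.idxOf x))).sum

lemma pvPhi_nil (N W : Nat) (ks : List String) : pvPhi N W ks [] = 0 := rfl

lemma pvPhi_cons (N W : Nat) (ks : List String) (x : String) (q : List String) :
    pvPhi N W ks (x :: q) = W ^ (N - ks.idxOf x) + pvPhi N W ks q := by
  simp [pvPhi]

lemma pvPhi_append (N W : Nat) (ks : List String) (q1 q2 : List String) :
    pvPhi N W ks (q1 ++ q2) = pvPhi N W ks q1 + pvPhi N W ks q2 := by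
  simp [pvPhi]

lemma pvPhi_congr (N W : Nat) (ks ks' : List String) (q : List String)
    (h : ∀ x ∈ q, ks.idxOf x = ks'.idxOf x) : pvPhi N W ks q = pvPhi N W ks' q := by
  unfold pvPhi
  congr 1
  apply List.map_congr_left
  intro a ha
  rw [h a ha]

lemma pvPhi_le (N W : Nat) (hW : 1 ≤ W) (ks : List String) (q : List String) (m : Nat)
    (h : ∀ x ∈ q, N - ks.idxOf x ≤ m) : pvPhi N W ks q ≤ q.length * W ^ m := by
  induction q with
  | nil => simp [pvPhi_nil]
  | cons a t ih =>
    rw [pvPhi_cons]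
    have h1 : W ^ (N - ks.idxOf a) ≤ W ^ m := Nat.pow_le_pow_right hW (h a List.mem_cons_self)
    have h2 := ih (fun x hx => h x (List.mem_cons_of_mem _ hx))
    calc W ^ (N - ks.idxOf a) + pvPhi N W ks t ≤ W ^ m + t.length * W ^ m :=
          Nat.add_le_add h1 h2
      _ = (a :: t).length * W ^ m := by simp [List.length_cons]; ring

-- the invariant tying A's state to the level dict
def pvINV (d : PySem.Dict String (List String)) (qA : List String)
    (L : PySem.Dict String Int) (P : PySem.Set String) : Prop :=
  (∀ x ∈ qA, x ∈ L.keys) ∧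
  (∀ x ∈ P, x ∈ L.keys) ∧
  (∀ t, t ∈ L.keys ↔ (t ∈ d.keys ∧ ∀ p ∈ d.getD t [], p ∈ P)) ∧
  (∀ t ∈ L.keys, L.getD t 0 = if d.getD t [] = [] then 0 else pvVal d L t) ∧
  (∀ t ∈ L.keys, ∀ p ∈ d.getD t [], p ∈ L.keys ∧ L.keys.idxOf p < L.keys.idxOf t) ∧
  (∀ t ∈ L.keys, t ∈ P ∨ t ∈ qA) ∧
  L.keys.Nodup

lemma pvLoopA_nil (d ch : PySem.Dict String (List String)) (fuel : Nat)
    (L : PySem.Dict String Int) (P : PySem.Set String) :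
    pvLoopA d ch fuel [] L P = L := by
  cases fuel <;> rfl

lemma pvStage1 (d chA chB : PySem.Dict String (List String))
    (_hk : d.keys.Nodup)
    (hAmem : ∀ x c, c ∈ chA.getD x [] ↔ (c ∈ d.keys ∧ x ∈ d.getD c []))
    (hAdedup : ∀ x, pvDedup (chA.getD x []) = pvCs d x)
    (hAlen : ∀ x, (chA.getD x []).length ≤ (d.items.map (fun p => p.2.length)).sum)
    (hch : ∀ x, chB.getD x [] = pvCs d x) :
    ∀ (fa fr : Nat) (qA : List String) (L : PySem.Dict String Int) (P : PySem.Set String),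
    pvINV d qA L P →
    pvPhi d.items.length ((d.items.map (fun p => p.2.length)).sum + 2) L.keys qA ≤ fa →
    (pvEss qA P).length + (d.items.length - L.keys.length) ≤ fr →
    pvLoopA d chA fa qA L P = pvLoopA d chB fr (pvEss qA P) L P := by
  intro fa
  set N := d.items.length with hN
  set E := (d.items.map (fun p => p.2.length)).sum with hE
  have hkeysN : d.keys.length = N := by
    show (d.items.map (fun p => p.1)).length = N
    rw [List.length_map]
  induction fa with
  | zero =>
    intro fr qA L P hinv hphi hfr
    cases qA with
    | nil => rw [pvEss_nil, pvLoopA_nil, pvLoopA_nil]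
    | cons x rest =>
      exfalso
      rw [pvPhi_cons] at hphi
      have h1 : 1 ≤ (E + 2) ^ (N - L.keys.idxOf x) := Nat.one_le_pow _ _ (by omega)
      omega
  | succ fa ih =>
    intro fr qA L P hinv hphi hfr
    obtain ⟨i1, i2, i3, i4, i5, i6, i7⟩ := hinv
    cases qA with
    | nil => rw [pvEss_nil, pvLoopA_nil, pvLoopA_nil]
    | cons x rest =>
      have hxkeys : x ∈ L.keys := i1 x List.mem_cons_self
      have hxd : x ∈ d.keys := ((i3 x).mp hxkeys).1
      have hsubkeys : L.keys ⊆ d.keys := fun t ht => ((i3 t).mp ht).1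
      have hlenkeys : L.keys.length ≤ N := by
        rw [← hkeysN]
        exact (List.subperm_of_subset i7 hsubkeys).length_le
      have hidxx : L.keys.idxOf x < L.keys.length := List.idxOf_lt_length_of_mem hxkeys
      -- the two fold characterizations, at processed set P ∪ {x}
      have hL' := pvFoldA_L d (PySem.Set.add P x) (chA.getD x []) L []
      have happ0 := pvFoldA_app d (PySem.Set.add P x) (chA.getD x []) L []
      rw [List.nil_append] at happ0
      set ready : String → Bool :=
        fun c => (d.getD c []).all (fun p => PySem.Set.contains (PySem.Set.add P x) p)
        with hreadydef
      set apps := (chA.getD x []).filter ready with happsdef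
      -- facts about ready children
      have happmem : ∀ c ∈ apps, (c ∈ d.keys ∧ x ∈ d.getD c []) ∧
          ∀ p ∈ d.getD c [], p ∈ PySem.Set.add P x := by
        intro c hc
        rcases List.mem_filter.mp hc with ⟨hc1, hc2⟩
        exact ⟨(hAmem x c).mp hc1, (pvReady_iff d _ c).mp hc2⟩
      have hparne : ∀ c ∈ apps, d.getD c [] ≠ [] := by
        intro c hc h0
        have := (happmem c hc).1.2
        rw [h0] at this
        exact List.not_mem_nil this
      by_cases hxP : x ∈ P
      · -- ===== garbage pop: x was already processed; nothing changes =====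
        have hPP : PySem.Set.add P x = P := by simp [PySem.Set.add, hxP]
        have hreadyc : ∀ c ∈ apps, c ∈ L.keys ∧ L.get? c = some (pvVal d L c) := by
          intro c hc
          have hpar : ∀ p ∈ d.getD c [], p ∈ P := by
            intro p hp
            have := (happmem c hc).2 p hp
            rwa [hPP] at this
          have hck : c ∈ L.keys := (i3 c).mpr ⟨(happmem c hc).1.1, hpar⟩
          have hval : L.getD c 0 = pvVal d L c := by
            have h4 := i4 c hck
            rwa [if_neg (hparne c hc)] at h4
          exact ⟨hck, by rw [pvGet?_of_mem_keys L c hck, hval]⟩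
        have hLnoop : pvG d L apps = L :=
          pvG_noop d _ L i7 (fun c hc => (hreadyc c hc).2)
        have happ_in : ∀ c ∈ apps, c ∈ P ∨ c ∈ rest := by
          intro c hc
          rcases i6 c (hreadyc c hc).1 with h1 | h1
          · exact Or.inl h1
          · rcases List.mem_cons.mp h1 with rfl | h2
            · exact Or.inl hxP
            · exact Or.inr h2
        have hEssEq : pvEss (x :: rest) P = pvEss (rest ++ apps) P := by
          rw [pvEss_cons_mem rest P x hxP, pvEss_append_absorb rest apps P happ_in]
        show pvLoopA d chA fa
            (rest ++ ((chA.getD x []).foldl _ (L, ([] : List String))).2) _ _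
          = pvLoopA d chB fr (pvEss (x :: rest) P) L P
        rw [hL', happ0, hLnoop, hPP, hEssEq]
        apply ih fr (rest ++ apps) L P
        · refine ⟨?_, i2, i3, i4, i5, ?_, i7⟩
          · intro y hy
            rcases List.mem_append.mp hy with hy | hy
            · exact i1 y (List.mem_cons_of_mem _ hy)
            · exact (hreadyc y hy).1
          · intro t ht
            rcases i6 t ht with h1 | h1
            · exact Or.inl h1
            · rcases List.mem_cons.mp h1 with rfl | h2
              · exact Or.inl hxP
              · exact Or.inr (List.mem_append.mpr (Or.inl h2))
        · -- potential decreases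
          rw [pvPhi_cons] at hphi
          rw [pvPhi_append]
          have hidxapps : ∀ c ∈ apps, N - L.keys.idxOf c ≤ (N - L.keys.idxOf x) - 1 := by
            intro c hc
            have h5 := i5 c (hreadyc c hc).1 x (happmem c hc).1.2
            omega
          have h1 : pvPhi N (E + 2) L.keys apps
              ≤ apps.length * (E + 2) ^ ((N - L.keys.idxOf x) - 1) :=
            pvPhi_le N (E + 2) (by omega) L.keys apps _ hidxapps
          have hlapps : apps.length ≤ E :=
            le_trans (List.length_filter_le _ _) (hAlen x)
          have h2 : apps.length * (E + 2) ^ ((N - L.keys.idxOf x) - 1)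
              ≤ E * (E + 2) ^ ((N - L.keys.idxOf x) - 1) :=
            Nat.mul_le_mul_right _ hlapps
          have hkpos : 1 ≤ N - L.keys.idxOf x := by omega
          have hsplit : (E + 2) ^ (N - L.keys.idxOf x)
              = (E + 2) ^ ((N - L.keys.idxOf x) - 1) * (E + 2) := by
            rw [← Nat.pow_succ]
            congr 1
            omega
          have hA1 : 1 ≤ (E + 2) ^ ((N - L.keys.idxOf x) - 1) := Nat.one_le_pow _ _ (by omega)
          set A := (E + 2) ^ ((N - L.keys.idxOf x) - 1) with hAdef
          have hexp : A * (E + 2) = E * A + 2 * A := by ring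
          omega
        · rw [← hEssEq, pvEss_cons_mem rest P x hxP]
          rw [pvEss_cons_mem rest P x hxP] at hfr
          omega
      · -- ===== essential pop: x processed for the first time =====
        -- every ready child is fresh
        have hfreshapps : ∀ c ∈ apps, c ∉ L.keys := by
          intro c hc hck
          have hxpar : x ∈ d.getD c [] := (happmem c hc).1.2
          exact hxP (((i3 c).mp hck).2 x hxpar)
        have hPsub : ∀ p, p ∈ PySem.Set.add P x → p ∈ L.keys := by
          intro p hp
          rcases (PySem.Set.mem_add P x p).mp hp with h1 | h1
          · exact i2 p h1
          · exact h1 ▸ hxkeys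
        -- the pvG hypotheses at base L with value function pvVal d L
        have hGH : pvGH d (fun c => pvVal d L c) apps L := by
          refine ⟨i7, fun c _ => rfl, ?_, ?_⟩
          · intro c hc hck
            exact absurd hck (hfreshapps c hc)
          · intro c1 h1 c2 h2 hnk hpar
            exact hnk (hPsub c1 ((happmem c2 h2).2 c1 hpar))
        have happs_dedup : pvDedup apps = (pvCs d x).filter ready := by
          rw [happsdef, pvDedup_filter, hAdedup x]
        have hLeq : pvG d L apps = pvG d L ((pvCs d x).filter ready) := by
          rw [← happs_dedup]
          exact pvG_e d (fun c => pvVal d L c) apps L hGH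
        -- keys of the new level dict
        have hkeys' : (pvG d L apps).keys = L.keys ++ (pvCs d x).filter ready := by
          rw [pvG_keys, ← happs_dedup]
          congr 2
          apply List.filter_eq_self.mpr
          intro a ha
          simpa using hfreshapps a ha
        have hgetD' := pvG_g d (fun c => pvVal d L c) apps L hGH
        -- unfold one step on both sides
        have hfr1 : 1 ≤ fr := by
          rw [pvEss_cons_not_mem rest P x hxP] at hfr
          simp only [List.length_cons] at hfr
          omega
        obtain ⟨fr', rfl⟩ : ∃ fr', fr = fr' + 1 := ⟨fr - 1, by omega⟩
        rw [pvEss_cons_not_mem rest P x hxP]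
        have hstepB_L := pvFoldA_L d (PySem.Set.add P x) (chB.getD x []) L []
        have hstepB_app := pvFoldA_app d (PySem.Set.add P x) (chB.getD x []) L []
        rw [List.nil_append] at hstepB_app
        show pvLoopA d chA fa
            (rest ++ ((chA.getD x []).foldl _ (L, ([] : List String))).2) _ _
          = pvLoopA d chB fr'
              (pvEss rest (PySem.Set.add P x)
                ++ ((chB.getD x []).foldl _ (L, ([] : List String))).2) _ _
        rw [hL', happ0, hstepB_L, hstepB_app, hch x, ← hreadydef, ← hLeq]
        -- the appended fresh children
        have hfreshP : ∀ c ∈ apps, c ∉ PySem.Set.add P x :=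
          fun c hc hm => hfreshapps c hc (hPsub c hm)
        have hfreshrest : ∀ c ∈ apps, c ∉ rest :=
          fun c hc hm => hfreshapps c hc (i1 c (List.mem_cons_of_mem _ hm))
        have hEss' : pvEss (rest ++ apps) (PySem.Set.add P x)
            = pvEss rest (PySem.Set.add P x) ++ (pvCs d x).filter ready := by
          rw [pvEss_append_fresh rest apps _ hfreshP hfreshrest, happs_dedup]
        rw [← hEss']
        -- parents of every task in the new dict live in the old keys
        have hparkeys : ∀ c ∈ apps, ∀ p ∈ d.getD c [], p ∈ L.keys :=
          fun c hc p hp => hPsub p ((happmem c hc).2 p hp)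
        have hvalstab : ∀ t, (∀ p ∈ d.getD t [], p ∈ L.keys) →
            pvVal d (pvG d L apps) t = pvVal d L t := by
          intro t hpar
          unfold pvVal
          have hmap : (d.getD t []).map (fun p => (pvG d L apps).getD p 0)
              = (d.getD t []).map (fun p => L.getD p 0) := by
            apply List.map_congr_left
            intro p hp
            rw [hgetD' p]
            have : p ∉ apps := fun hm => hfreshapps p hm (hpar p hp)
            rw [if_neg this]
          rw [hmap]
        have holdpar : ∀ t ∈ L.keys, ∀ p ∈ d.getD t [], p ∈ L.keys :=
          fun t ht p hp => (i5 t ht p hp).1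
        have hmemkeys' : ∀ t, t ∈ (pvG d L apps).keys ↔ t ∈ L.keys ∨ t ∈ apps := by
          intro t
          rw [hkeys', List.mem_append, ← happs_dedup, mem_pvDedup]
        apply ih fr' (rest ++ apps) (pvG d L apps) (PySem.Set.add P x)
        · -- the invariant at the new state
          refine ⟨?_, ?_, ?_, ?_, ?_, ?_, ?_⟩
          · intro y hy
            rcases List.mem_append.mp hy with hy | hy
            · exact (hmemkeys' y).mpr (Or.inl (i1 y (List.mem_cons_of_mem _ hy)))
            · exact (hmemkeys' y).mpr (Or.inr hy)
          · intro y hy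
            exact (hmemkeys' y).mpr (Or.inl (hPsub y hy))
          · intro t
            rw [hmemkeys' t]
            constructor
            · rintro (ht | ht)
              · obtain ⟨ht1, ht2⟩ := (i3 t).mp ht
                exact ⟨ht1, fun p hp => (PySem.Set.mem_add P x p).mpr (Or.inl (ht2 p hp))⟩
              · exact ⟨(happmem t ht).1.1, (happmem t ht).2⟩
            · rintro ⟨htd, htp⟩
              by_cases hall : ∀ p ∈ d.getD t [], p ∈ P
              · exact Or.inl ((i3 t).mpr ⟨htd, hall⟩)
              · push Not at hall
                obtain ⟨p0, hp0mem, hp0P⟩ := hall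
                have hp0x : p0 = x := by
                  rcases (PySem.Set.mem_add P x p0).mp (htp p0 hp0mem) with h1 | h1
                  · exact absurd h1 hp0P
                  · exact h1
                refine Or.inr (List.mem_filter.mpr ⟨(hAmem x t).mpr ⟨htd, hp0x ▸ hp0mem⟩, ?_⟩)
                exact (pvReady_iff d _ t).mpr htp
          · intro t ht
            rcases (hmemkeys' t).mp ht with h1 | h1
            · rw [hgetD' t, if_neg (fun hm => hfreshapps t hm h1), i4 t h1]
              by_cases h0 : d.getD t [] = []
              · rw [if_pos h0, if_pos h0]
              · rw [if_neg h0, if_neg h0, hvalstab t (holdpar t h1)]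
            · rw [hgetD' t, if_pos h1, if_neg (hparne t h1), hvalstab t (hparkeys t h1)]
          · intro t ht p hp
            rcases (hmemkeys' t).mp ht with h1 | h1
            · obtain ⟨hpk, hpidx⟩ := i5 t h1 p hp
              refine ⟨(hmemkeys' p).mpr (Or.inl hpk), ?_⟩
              rw [hkeys', List.idxOf_append_of_mem hpk, List.idxOf_append_of_mem h1]
              exact hpidx
            · have hpk : p ∈ L.keys := hparkeys t h1 p hp
              refine ⟨(hmemkeys' p).mpr (Or.inl hpk), ?_⟩
              rw [hkeys', List.idxOf_append_of_mem hpk,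
                List.idxOf_append_of_notMem (fun hm => hfreshapps t h1 hm)]
              have := List.idxOf_lt_length_of_mem hpk
              omega
          · intro t ht
            rcases (hmemkeys' t).mp ht with h1 | h1
            · rcases i6 t h1 with h2 | h2
              · exact Or.inl ((PySem.Set.mem_add P x t).mpr (Or.inl h2))
              · rcases List.mem_cons.mp h2 with heq | h3
                · exact Or.inl ((PySem.Set.mem_add P x t).mpr (Or.inr heq))
                · exact Or.inr (List.mem_append.mpr (Or.inl h3))
            · exact Or.inr (List.mem_append.mpr (Or.inr h1))
          · rw [hkeys']
            rw [List.nodup_append]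
            refine ⟨i7, ?_, ?_⟩
            · rw [← happs_dedup]
              exact nodup_pvDedup _
            · intro a ha b hb heq
              subst heq
              have : a ∈ apps := by
                rw [← mem_pvDedup, happs_dedup]
                exact hb
              exact hfreshapps a this ha
        · -- potential decreases
          rw [pvPhi_cons] at hphi
          rw [pvPhi_append]
          have hphirest : pvPhi N (E + 2) (pvG d L apps).keys rest
              = pvPhi N (E + 2) L.keys rest := by
            apply pvPhi_congr
            intro y hy
            rw [hkeys', List.idxOf_append_of_mem (i1 y (List.mem_cons_of_mem _ hy))]
          have hidxapps : ∀ c ∈ apps,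
              N - (pvG d L apps).keys.idxOf c ≤ (N - L.keys.idxOf x) - 1 := by
            intro c hc
            have hnotm : c ∉ L.keys := hfreshapps c hc
            rw [hkeys', List.idxOf_append_of_notMem hnotm]
            omega
          have h1 : pvPhi N (E + 2) (pvG d L apps).keys apps
              ≤ apps.length * (E + 2) ^ ((N - L.keys.idxOf x) - 1) :=
            pvPhi_le N (E + 2) (by omega) _ apps _ hidxapps
          have hlapps : apps.length ≤ E :=
            le_trans (List.length_filter_le _ _) (hAlen x)
          have h2 : apps.length * (E + 2) ^ ((N - L.keys.idxOf x) - 1)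
              ≤ E * (E + 2) ^ ((N - L.keys.idxOf x) - 1) :=
            Nat.mul_le_mul_right _ hlapps
          have hkpos : 1 ≤ N - L.keys.idxOf x := by omega
          have hsplit : (E + 2) ^ (N - L.keys.idxOf x)
              = (E + 2) ^ ((N - L.keys.idxOf x) - 1) * (E + 2) := by
            rw [← Nat.pow_succ]
            congr 1
            omega
          have hA1 : 1 ≤ (E + 2) ^ ((N - L.keys.idxOf x) - 1) := Nat.one_le_pow _ _ (by omega)
          set A := (E + 2) ^ ((N - L.keys.idxOf x) - 1) with hAdef
          have hexp : A * (E + 2) = E * A + 2 * A := by ring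
          rw [hphirest]
          omega
        · -- the reference fuel stays sufficient
          rw [hEss']
          rw [pvEss_cons_not_mem rest P x hxP] at hfr
          rw [List.length_append]
          rw [List.length_cons] at hfr
          have hanew : ((pvCs d x).filter ready).length ≤ apps.length := by
            rw [← happs_dedup]
            exact pvDedup_length_le apps
          have hklen' : (pvG d L apps).keys.length
              = L.keys.length + ((pvCs d x).filter ready).length := by
            rw [hkeys', List.length_append]
          have hsub' : (pvG d L apps).keys ⊆ d.keys := by
            intro t ht
            rcases (hmemkeys' t).mp ht with h1 | h1
            · exact hsubkeys h1
            · exact (happmem t h1).1.1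
          have hnd' : (pvG d L apps).keys.Nodup := by
            rw [hkeys', List.nodup_append]
            refine ⟨i7, by rw [← happs_dedup]; exact nodup_pvDedup _, ?_⟩
            intro a ha b hb heq
            subst heq
            have : a ∈ apps := by rw [← mem_pvDedup, happs_dedup]; exact hb
            exact hfreshapps a this ha
          have hlen' : (pvG d L apps).keys.length ≤ N := by
            rw [← hkeysN]
            exact (List.subperm_of_subset hnd' hsub').length_le
          rw [hklen'] at hlen'
          omega

-- ===== initial state lemmas =====
lemma pvInDeg_items (items : List (String × List String))
    (hk : (items.map (fun p => p.1)).Nodup) :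
    (pvInDegA items).items = items.map (fun p => (p.1, (p.2.length : Int))) := by
  unfold pvInDegA
  have := PySem.Dict.items_foldl_insert_fresh items (fun p => p.1)
    (fun p => (p.2.length : Int)) PySem.Dict.empty
    (fun a _ => PySem.Dict.contains_empty a.1) hk
  simpa using this

lemma pvRem_items (items : List (String × List String))
    (hk : (items.map (fun p => p.1)).Nodup) :
    (pvRemaining0 items).items
      = items.map (fun p => (p.1, ((PySem.List.dedup p.2).length : Int))) := by
  unfold pvRemaining0
  have := PySem.Dict.items_foldl_insert_fresh items (fun p => p.1)
    (fun p => ((PySem.List.dedup p.2).length : Int)) PySem.Dict.empty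
    (fun a _ => PySem.Dict.contains_empty a.1) hk
  simpa using this

lemma pvInit_levels_eq (deg : PySem.Dict String Int) :
    (pvQueue0A deg).foldl (fun L t => L.insert t (0 : Int)) PySem.Dict.empty
      = pvLevels0B deg := by
  unfold pvQueue0A pvLevels0B
  rw [List.foldl_map]
  exact List.foldl_filter

lemma pvLevels0B_filter_form (deg : PySem.Dict String Int) :
    pvLevels0B deg = (deg.items.filter (fun p => p.2 == 0)).foldl
      (fun L p => L.insert p.1 (0 : Int)) PySem.Dict.empty := by
  unfold pvLevels0B
  exact (List.foldl_filter (p := fun p : String × Int => p.2 == 0)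
    (f := fun (L : PySem.Dict String Int) (p : String × Int) => L.insert p.1 (0 : Int))).symm

lemma pvQueueB_eq (deg : PySem.Dict String Int) (h : deg.keys.Nodup) :
    (pvLevels0B deg).keys = pvQueue0A deg := by
  rw [pvLevels0B_filter_form]
  have hkeys := PySem.Dict.keys_foldl_insert_key (deg.items.filter (fun p => p.2 == 0))
    (fun p => p.1) (fun _ _ => (0 : Int)) PySem.Dict.empty
  rw [hkeys, PySem.Dict.keys_empty]
  have hnd : ((deg.items.filter (fun p => p.2 == 0)).map (fun p => p.1)).Nodup :=
    (((List.filter_sublist).map (fun p : String × Int => p.1)).nodup) h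
  have hupd : PySem.Set.update ([] : PySem.Set String)
      ((deg.items.filter (fun p => p.2 == 0)).map (fun p => p.1))
      = PySem.Set.ofList ((deg.items.filter (fun p => p.2 == 0)).map (fun p => p.1)) := rfl
  rw [hupd, PySem.Set.ofList_eq_self_of_nodup _ hnd]
  rfl

lemma pvQueue0A_char (items : List (String × List String))
    (hk : (items.map (fun p => p.1)).Nodup) :
    pvQueue0A (pvInDegA items)
      = (items.filter (fun p => p.2.length == 0)).map (fun p => p.1) := by
  unfold pvQueue0A
  rw [pvInDeg_items items hk, List.filter_map, List.map_map]
  have hcond : ((fun (p : String × Int) => p.2 == 0) ∘ fun p : String × List String =>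
      (p.1, (p.2.length : Int))) = (fun p : String × List String => p.2.length == 0) := by
    funext p
    simp
  rw [hcond]
  rfl

lemma pvDedupLen_zero_iff (l : List String) :
    (((PySem.List.dedup l).length : Int) == 0) = (l.length == 0) := by
  rw [pvListDedup_eq]
  by_cases h0 : l = []
  · subst h0; simp [pvDedup_nil]
  · have h1 : pvDedup l ≠ [] := fun hc => h0 ((pvDedup_eq_nil_iff l).mp hc)
    have h2 : (pvDedup l).length ≠ 0 := fun hc => h1 (List.length_eq_zero_iff.mp hc)
    have h3 : l.length ≠ 0 := fun hc => h0 (List.length_eq_zero_iff.mp hc)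
    simp [h2, h3]

lemma pvQueue0B_char (items : List (String × List String))
    (hk : (items.map (fun p => p.1)).Nodup) :
    pvQueue0A (pvRemaining0 items)
      = (items.filter (fun p => p.2.length == 0)).map (fun p => p.1) := by
  unfold pvQueue0A
  rw [pvRem_items items hk, List.filter_map, List.map_map]
  have hcond : ((fun (p : String × Int) => p.2 == 0) ∘ fun p : String × List String =>
      (p.1, ((PySem.List.dedup p.2).length : Int)))
      = (fun p : String × List String => p.2.length == 0) := by
    funext p
    show (((PySem.List.dedup p.2).length : Int) == 0) = (p.2.length == 0)
    exact pvDedupLen_zero_iff p.2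
  rw [hcond]
  rfl

lemma pvLevels0_eq (items : List (String × List String))
    (hk : (items.map (fun p => p.1)).Nodup) :
    pvLevels0B (pvInDegA items) = pvLevels0B (pvRemaining0 items) := by
  rw [pvLevels0B_filter_form, pvLevels0B_filter_form, pvInDeg_items items hk,
    pvRem_items items hk, List.filter_map, List.filter_map, List.foldl_map, List.foldl_map]
  have hfil : items.filter ((fun (p : String × Int) => p.2 == 0)
        ∘ (fun p : String × List String => (p.1, (p.2.length : Int))))
      = items.filter ((fun (p : String × Int) => p.2 == 0)
        ∘ (fun p : String × List String => (p.1, ((PySem.List.dedup p.2).length : Int)))) := by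
    apply List.filter_congr
    intro p _
    show ((p.2.length : Int) == 0) = (((PySem.List.dedup p.2).length : Int) == 0)
    rw [pvDedupLen_zero_iff]
    simp
  rw [hfil]

lemma pvGetD_fold0 : ∀ (l : List String) (Ld : PySem.Dict String Int),
    (∀ t, Ld.getD t 0 = 0) → ∀ t,
    (l.foldl (fun L x => L.insert x (0 : Int)) Ld).getD t 0 = 0
  | [], Ld, h, t => h t
  | x :: l, Ld, h, t => by
    simp only [List.foldl_cons]
    refine pvGetD_fold0 l _ (fun s => ?_) t
    rw [PySem.Dict.getD_insert]
    by_cases hs : s = x <;> simp [hs, h]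

lemma pvFoldIns_size_le : ∀ (l : List (String × List String))
    (dd : PySem.Dict String (List String)),
    ((l.foldl (fun d p => d.insert p.1 p.2) dd).items).length ≤ dd.items.length + l.length
  | [], _ => by simp
  | p :: t, dd => by
    simp only [List.foldl_cons, List.length_cons]
    have h1 := pvFoldIns_size_le t (dd.insert p.1 p.2)
    have h2 : (dd.insert p.1 p.2).items.length ≤ dd.items.length + 1 := by
      rw [PySem.Dict.items_insert]
      by_cases hc : dd.contains p.1 <;> simp [hc]
    omega

lemma pvDict_len_le (task_deps : List (String × List String)) :
    (pvDictOf task_deps).items.length ≤ task_deps.length := by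
  have h := pvFoldIns_size_le task_deps PySem.Dict.empty
  have h0 : (PySem.Dict.empty : PySem.Dict String (List String)).items.length = 0 := rfl
  rw [show pvDictOf task_deps
      = task_deps.foldl (fun d p => d.insert p.1 p.2) PySem.Dict.empty from rfl]
  omega

-- ===== VERDICT (by name: the statement is the Claim_ definition above) =====
theorem compute_topological_levels_spec : Claim_equal_compute_topological_levels := by
  intro task_deps _
  unfold Spec_compute_topological_levels
  simp only [compute_topological_levels, compute_topological_levels_alt]
  refine congrArg PySem.Dict.items ?_
  have hk : (pvDictOf task_deps).keys.Nodup := PySem.Dict.nodup_keys_ofList task_deps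
  set d := pvDictOf task_deps with hd
  set qA0 := pvQueue0A (pvInDegA d.items) with hqA0
  have hq0char : qA0 = (d.items.filter (fun p => p.2.length == 0)).map (fun p => p.1) :=
    pvQueue0A_char d.items hk
  have hremkeys : (pvRemaining0 d.items).keys = d.items.map (fun p => p.1) := by
    show (pvRemaining0 d.items).items.map (fun p => p.1) = _
    rw [pvRem_items d.items hk, List.map_map]
    rfl
  set L0 := qA0.foldl (fun L t => L.insert t (0 : Int)) PySem.Dict.empty with hL0def
  have hL0B : L0 = pvLevels0B (pvRemaining0 d.items) := by
    rw [hL0def, hqA0, pvInit_levels_eq, pvLevels0_eq d.items hk]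
  have hqB0 : (pvLevels0B (pvRemaining0 d.items)).keys = qA0 := by
    rw [pvQueueB_eq (pvRemaining0 d.items) (by rw [hremkeys]; exact hk),
      pvQueue0B_char d.items hk, hq0char]
  have hqB0' : pvQueue0A (pvRemaining0 d.items) = qA0 := by
    rw [pvQueue0B_char d.items hk, hq0char]
  rw [pvInitB_fst, pvInitB_snd, pvSeedB_fst, pvSeedB_snd, hqB0', ← hL0B]
  have hq0mem : ∀ x, x ∈ qA0 ↔ (x ∈ d.keys ∧ d.getD x [] = []) := by
    intro x
    rw [hq0char]
    constructor
    · intro hx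
      obtain ⟨p, hpf, rfl⟩ := List.mem_map.mp hx
      obtain ⟨hpi, hplen⟩ := List.mem_filter.mp hpf
      refine ⟨List.mem_map_of_mem hpi, ?_⟩
      rw [PySem.Dict.getD_of_mem_items d hpi hk []]
      exact List.length_eq_zero_iff.mp (by simpa using hplen)
    · rintro ⟨hxk, hxnil⟩
      obtain ⟨p, hp, rfl⟩ := List.mem_map.mp hxk
      have hgd : d.getD p.1 [] = p.2 := PySem.Dict.getD_of_mem_items d hp hk []
      rw [hgd] at hxnil
      exact List.mem_map_of_mem (List.mem_filter.mpr ⟨hp, by simp [hxnil]⟩)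
  have hq0nodup : qA0.Nodup := by
    rw [hq0char]
    exact ((List.filter_sublist).map (fun p : String × List String => p.1)).nodup hk
  have hkeysL0 : L0.keys = qA0 := by rw [hL0B, hqB0]
  have hgetD0 : ∀ t, L0.getD t 0 = 0 := by
    rw [hL0def]
    exact pvGetD_fold0 qA0 PySem.Dict.empty (fun t => PySem.Dict.getD_empty t 0)
  have hq0len : qA0.length ≤ d.items.length := by
    rw [hq0char, List.length_map]
    exact List.length_filter_le _ _
  have hEss0 : pvEss qA0 PySem.Set.empty = qA0 := by
    unfold pvEss
    rw [List.filter_eq_self.mpr (fun a _ => by simp [PySem.Set.contains, PySem.Set.empty]),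
      pvDedup_eq_self_of_nodup qA0 hq0nodup]
  have hINV0 : pvINV d qA0 L0 PySem.Set.empty := by
    refine ⟨?_, ?_, ?_, ?_, ?_, ?_, ?_⟩
    · intro x hx; rw [hkeysL0]; exact hx
    · intro x hx; cases hx
    · intro t
      rw [hkeysL0, hq0mem t]
      constructor
      · rintro ⟨h1, h2⟩
        exact ⟨h1, by rw [h2]; intro p hp; cases hp⟩
      · rintro ⟨h1, h2⟩
        refine ⟨h1, List.eq_nil_iff_forall_not_mem.mpr (fun a ha => ?_)⟩
        cases h2 a ha
    · intro t ht
      rw [hkeysL0, hq0mem t] at ht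
      rw [hgetD0 t, if_pos ht.2]
    · intro t ht p hp
      rw [hkeysL0, hq0mem t] at ht
      rw [ht.2] at hp
      cases hp
    · intro t ht
      rw [hkeysL0] at ht
      exact Or.inr ht
    · rw [hkeysL0]; exact hq0nodup
  have hPhi0 : pvPhi d.items.length ((d.items.map (fun p => p.2.length)).sum + 2) L0.keys qA0
      ≤ pvFuelA d.items := by
    set N := d.items.length with hN
    set E := (d.items.map (fun p => p.2.length)).sum with hE
    have h1 : pvPhi N (E + 2) L0.keys qA0 ≤ qA0.length * (E + 2) ^ N :=
      pvPhi_le N (E + 2) (by omega) L0.keys qA0 N (fun x _ => Nat.sub_le _ _)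
    have h2 : qA0.length * (E + 2) ^ N ≤ N * (E + 2) ^ N :=
      Nat.mul_le_mul_right _ hq0len
    have h3 : N * (E + 2) ^ N ≤ N * (E + N + 2) ^ N :=
      Nat.mul_le_mul_left _ (Nat.pow_le_pow_left (by omega) N)
    have h4 : N * (E + N + 2) ^ N ≤ (E + N + 2) * (E + N + 2) ^ N :=
      Nat.mul_le_mul_right _ (by omega)
    have h5 : (E + N + 2) * (E + N + 2) ^ N = (E + N + 2) ^ (N + 1) := by
      rw [Nat.pow_succ]; ring
    have h6 : (E + N + 2) ^ (N + 1) ≤ (E + N + 2) ^ (N + 2) :=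
      Nat.pow_le_pow_right (by omega) (by omega)
    have h7 : pvFuelA d.items = (E + N + 2) ^ (N + 2) := by
      unfold pvFuelA
      rw [← hE, ← hN]
    omega
  have hFr0 : (pvEss qA0 PySem.Set.empty).length
      + (d.items.length - L0.keys.length) ≤ task_deps.length + 1 := by
    rw [hEss0, hkeysL0]
    have hle := pvDict_len_le task_deps
    rw [← hd] at hle
    omega
  rw [pvStage1 d (pvChildrenA d.items) (pvChildrenB d.items) hk
      (fun x c => pvMem_chA d hk x c) (fun x => pvDedup_chA d hk x)
      (fun x => pvLen_chA d.items x) (fun x => pvChB_eq_cs d.items x)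
      (pvFuelA d.items) (task_deps.length + 1) qA0 L0 PySem.Set.empty hINV0 hPhi0 hFr0,
    hEss0]
  apply pvLoop_eq d (pvChildrenB d.items) hk
    (fun x _ => pvChB_eq_cs d.items x)
    (task_deps.length + 1) qA0 L0 PySem.Set.empty (pvRemaining0 d.items)
  · intro x hx
    exact ((hq0mem x).mp hx).1
  · exact hq0nodup
  · intro x _ hx
    cases hx
  · intro c hck
    obtain ⟨p, hp, rfl⟩ := List.mem_map.mp hck
    have hrd : (pvRemaining0 d.items).keys.Nodup := by rw [hremkeys]; exact hk
    have hmem : (p.1, ((PySem.List.dedup p.2).length : Int)) ∈ (pvRemaining0 d.items).items := by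
      rw [pvRem_items d.items hk]
      exact List.mem_map_of_mem hp
    have h1 : (pvRemaining0 d.items).getD p.1 0 = ((PySem.List.dedup p.2).length : Int) :=
      PySem.Dict.getD_of_mem_items (pvRemaining0 d.items) hmem hrd 0
    have h2 : d.getD p.1 [] = p.2 := PySem.Dict.getD_of_mem_items d hp hk []
    rw [h1]
    unfold pvCnt
    rw [h2]
    have hfilter : (pvDedup p.2).filter (fun q => !(PySem.Set.contains PySem.Set.empty q))
        = pvDedup p.2 :=
      List.filter_eq_self.mpr (fun a _ => by simp [PySem.Set.contains, PySem.Set.empty])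
    rw [hfilter, pvListDedup_eq]
  · intro x hx p hp
    rw [((hq0mem x).mp hx).2] at hp
    cases hp
  · intro x hx
    cases hx
  · intro t0
    rw [hgetD0 t0]
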